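-- pv_equiv track=rewrite | github.com/bh2980/Algorithm-Problem | 백준/Gold/20058. 마법사 상어와 파이어스톰/마법사 상어와 파이어스톰.py | calcRestIce
-- ===== SOURCE A (Python) =====
-- from collections import deque
--
-- def calcRestIce(iceMap):
--     LENGTH = len(iceMap)
--     totalIce = 0
--     maxSize = 0
--     visitedSet = set()
--
--     for i in range(LENGTH):
--         for j in range(LENGTH):
--             totalIce += iceMap[i][j]
--
--             if iceMap[i][j] == 0 or (i, j) in visitedSet:
--                 continue
--
--             queue = deque([(i, j)])
--             visitedSet.add((i, j))
--             iceSize = 0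
--
--             di = [-1, 0, 1, 0]
--             dj = [0, -1, 0, 1]
--
--             while len(queue) > 0:
--                 ci, cj = queue.popleft()
--                 iceSize += 1
--
--                 for idx in range(4):
--                     ni, nj = ci + di[idx], cj + dj[idx]
--
--                     if 0 <= ni < LENGTH and 0 <= nj < LENGTH and (ni, nj) not in visitedSet and iceMap[ni][nj] != 0:
--                         visitedSet.add((ni, nj))
--                         queue.append((ni, nj))
--
--             maxSize = max(iceSize, maxSize)
--
--     return [totalIce, maxSize]
-- ===== SOURCE B (Python) =====
-- def calcRestIce(iceMap):
--     n = len(iceMap)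
--     total = 0
--     parent = {}
--     size = {}
--     for i in range(n):
--         for j in range(n):
--             total += iceMap[i][j]
--             if iceMap[i][j] != 0:
--                 parent[(i, j)] = (i, j)
--                 size[(i, j)] = 1
--
--     def find(x):
--         while parent[x] != x:
--             x = parent[x]
--         return x
--
--     best = 1 if parent else 0
--     for i in range(n):
--         for j in range(n):
--             if iceMap[i][j] == 0:
--                 continue
--             for ni, nj in ((i + 1, j), (i, j + 1)):
--                 if ni < n and nj < n and iceMap[ni][nj] != 0:
--                     ra = find((i, j))
--                     rb = find((ni, nj))
--                     if ra != rb: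
--                         newSize = size[ra] + size[rb]
--                         parent[rb] = ra
--                         size[ra] = newSize
--                         if newSize > best:
--                             best = newSize
--     return [total, best]
-- ===== Notes on version B (the rewrite author's own statement) =====
-- stated objective: alternative
-- what changed: BFS flood-fill with a deque and a visited set is replaced by a union-find (disjoint-set) structure over the grid: every ice cell becomes its own node, each ice cell is unioned with its right and down ice neighbours while a size dict and a running maximum of merged component sizes are maintained, so no graph traversal happens at all.
import Mathlib
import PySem

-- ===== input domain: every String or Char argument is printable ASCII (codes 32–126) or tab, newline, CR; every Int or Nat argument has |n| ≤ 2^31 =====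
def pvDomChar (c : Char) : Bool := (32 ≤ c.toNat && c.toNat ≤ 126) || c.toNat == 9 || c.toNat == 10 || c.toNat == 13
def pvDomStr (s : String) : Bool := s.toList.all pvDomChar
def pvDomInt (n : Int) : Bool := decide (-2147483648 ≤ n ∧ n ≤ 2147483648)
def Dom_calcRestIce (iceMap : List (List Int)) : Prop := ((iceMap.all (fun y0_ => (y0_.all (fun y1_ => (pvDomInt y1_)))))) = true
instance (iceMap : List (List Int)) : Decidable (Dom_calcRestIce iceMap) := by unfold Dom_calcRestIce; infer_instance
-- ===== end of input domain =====

-- B replaces A's BFS flood fill (deque + visited set + per-component max) by a union-find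
-- (disjoint-set) structure: every ice cell becomes a node, each ice cell is unioned with its right
-- and down ice neighbours while a size dict and a running maximum of merged sizes are maintained;
-- no traversal of the grid graph happens at all (objective: alternative algorithm, not speed).

-- ===== PORT A =====

-- iceMap[i][j] — exact where Pre_ holds (both indices in range); Python raises IndexError exactly outside Pre_.
def getIJ (m : List (List Int)) (i j : Int) : Int :=
  PySem.List.pyGetD (PySem.List.pyGetD m i []) j 0

def pvDi : List Int := [-1, 0, 1, 0]
def pvDj : List Int := [0, -1, 0, 1]

-- the 'for idx in range(4)' neighbour loop of A
def bfsStepA (m : List (List Int)) (n : Int)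
    (s : PySem.Set (Int × Int) × List (Int × Int)) (c : Int × Int) :
    PySem.Set (Int × Int) × List (Int × Int) :=
  (PySem.List.pyRange 0 4 1).foldl (fun s idx =>
    let ni := c.1 + PySem.List.pyGetD pvDi idx 0
    let nj := c.2 + PySem.List.pyGetD pvDj idx 0
    if 0 ≤ ni ∧ ni < n ∧ 0 ≤ nj ∧ nj < n ∧ (ni, nj) ∉ s.1 ∧ getIJ m ni nj ≠ 0 then
      (PySem.Set.add s.1 (ni, nj), s.2 ++ [(ni, nj)])
    else s) s

-- the 'while len(queue) > 0' loop of A; the fuel only guards totality and is proven sufficient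
def bfsA (m : List (List Int)) (n : Int) :
    Nat → PySem.Set (Int × Int) → List (Int × Int) → Int → PySem.Set (Int × Int) × Int
  | _, V, [], size => (V, size)
  | 0, V, _ :: _, size => (V, size)
  | fuel + 1, V, c :: rest, size =>
      let s := bfsStepA m n (V, rest) c
      bfsA m n fuel s.1 s.2 (size + 1)

def calcRestIce (iceMap : List (List Int)) : List Int :=
  let n : Int := PySem.List.len iceMap
  let st := (PySem.List.pyRange 0 n 1).foldl (fun st i =>
    (PySem.List.pyRange 0 n 1).foldl (fun st j =>
      let total := st.1 + getIJ iceMap i j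
      if getIJ iceMap i j = 0 ∨ (i, j) ∈ st.2.2 then (total, st.2.1, st.2.2)
      else
        let r := bfsA iceMap n (iceMap.length * iceMap.length + 1)
                   (PySem.Set.add st.2.2 (i, j)) [(i, j)] 0
        (total, max r.2 st.2.1, r.1)) st)
    ((0 : Int), (0 : Int), (PySem.Set.empty : PySem.Set (Int × Int)))
  [st.1, st.2.1]

-- ===== PORT B =====

-- the 'while parent[x] != x' loop of B's find; fuel only guards totality and is proven sufficient
def ufFind (p : PySem.Dict (Int × Int) (Int × Int)) : Nat → (Int × Int) → (Int × Int)
  | 0, x => x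
  | f + 1, x =>
      let px := p.getD x x
      if px = x then x else ufFind p f px

-- the body of B's union (find twice, then re-root and merge the sizes and the running best)
def ufUnite (st : PySem.Dict (Int × Int) (Int × Int) × PySem.Dict (Int × Int) Int × Int)
    (a b : Int × Int) :
    PySem.Dict (Int × Int) (Int × Int) × PySem.Dict (Int × Int) Int × Int :=
  let ra := ufFind st.1 (st.1.size + 1) a
  let rb := ufFind st.1 (st.1.size + 1) b
  if ra ≠ rb then
    let ns := st.2.1.getD ra 0 + st.2.1.getD rb 0
    (st.1.insert rb ra, st.2.1.insert ra ns, if ns > st.2.2 then ns else st.2.2)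
  else st

def calcRestIce_alt (iceMap : List (List Int)) : List Int :=
  let n : Int := PySem.List.len iceMap
  let init := (PySem.List.pyRange 0 n 1).foldl (fun st i =>
    (PySem.List.pyRange 0 n 1).foldl (fun st j =>
      let t := st.1 + getIJ iceMap i j
      if getIJ iceMap i j ≠ 0 then (t, st.2.1.insert (i, j) (i, j), st.2.2.insert (i, j) 1)
      else (t, st.2)) st)
    ((0 : Int), (PySem.Dict.empty : PySem.Dict (Int × Int) (Int × Int)),
      (PySem.Dict.empty : PySem.Dict (Int × Int) Int))
  let best0 : Int := if init.2.1.size = 0 then 0 else 1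
  let fin := (PySem.List.pyRange 0 n 1).foldl (fun st i =>
    (PySem.List.pyRange 0 n 1).foldl (fun st j =>
      if getIJ iceMap i j = 0 then st
      else
        [((i + 1, j) : Int × Int), (i, j + 1)].foldl (fun st d =>
          if d.1 < n ∧ d.2 < n ∧ getIJ iceMap d.1 d.2 ≠ 0 then ufUnite st (i, j) d
          else st) st) st)
    (init.2.1, init.2.2, best0)
  [init.1, fin.2.2]

-- ===== PRECONDITION & SPEC =====

-- Pre_ excludes exactly the inputs where A raises IndexError: some row shorter than the number of rows.
def Pre_calcRestIce (iceMap : List (List Int)) : Prop :=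
  ∀ row ∈ iceMap, iceMap.length ≤ row.length
instance (iceMap : List (List Int)) : Decidable (Pre_calcRestIce iceMap) := by
  unfold Pre_calcRestIce; infer_instance

def pvWitness_calcRestIce : List (List Int) := [[1, 0], [0, 2]]

def Spec_calcRestIce (iceMap : List (List Int)) (out : List Int) : Prop := out = calcRestIce_alt iceMap
instance (iceMap : List (List Int)) (out : List Int) : Decidable (Spec_calcRestIce iceMap out) := by
  unfold Spec_calcRestIce; infer_instance

-- ===== CLAIM (what is proved, stated in full; the proofs are below) =====
def Claim_equal_calcRestIce : Prop := ∀ (iceMap : List (List Int)), Dom_calcRestIce iceMap → Pre_calcRestIce iceMap → Spec_calcRestIce iceMap (calcRestIce iceMap)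

-- ===== LEMMAS AND PROOFS =====


-- c is inside the n×n grid
def InG (n : Int) (c : Int × Int) : Prop := 0 ≤ c.1 ∧ c.1 < n ∧ 0 ≤ c.2 ∧ c.2 < n

-- c is an ice cell of m
def IceP (m : List (List Int)) (c : Int × Int) : Prop :=
  InG (m.length : Int) c ∧ getIJ m c.1 c.2 ≠ 0

-- d is one of the four neighbours of c
def OffP (c d : Int × Int) : Prop :=
  (d.1 = c.1 - 1 ∧ d.2 = c.2) ∨ (d.1 = c.1 + 1 ∧ d.2 = c.2) ∨
  (d.1 = c.1 ∧ d.2 = c.2 - 1) ∨ (d.1 = c.1 ∧ d.2 = c.2 + 1)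

-- 4-adjacency between ice cells
def AdjP (m : List (List Int)) (c d : Int × Int) : Prop :=
  IceP m c ∧ IceP m d ∧ OffP c d

def ReachP (m : List (List Int)) : Int × Int → Int × Int → Prop :=
  Relation.ReflTransGen (AdjP m)

-- a right or down edge between ice cells (the edges B unions)
def DR (m : List (List Int)) (a b : Int × Int) : Prop :=
  AdjP m a b ∧ ((b.1 = a.1 + 1 ∧ b.2 = a.2) ∨ (b.1 = a.1 ∧ b.2 = a.2 + 1))

-- the cell examined by A's direction index idx
def mvA (c : Int × Int) (idx : Int) : Int × Int :=
  (c.1 + PySem.List.pyGetD pvDi idx 0, c.2 + PySem.List.pyGetD pvDj idx 0)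

-- all cells of the n×n grid (Nat-indexed, for counting)
def gcells (n : Nat) : List (Int × Int) :=
  (List.range n).flatMap (fun (i : Nat) => (List.range n).map (fun (j : Nat) => ((i : Int), (j : Int))))

-- all cells of the n×n grid in the scan order of both programs
def cellsL (n : Int) : List (Int × Int) :=
  (PySem.List.pyRange 0 n 1).flatMap (fun i => (PySem.List.pyRange 0 n 1).map (fun j => (i, j)))

-- the ice cells in scan order
def icelist (m : List (List Int)) : List (Int × Int) :=
  (cellsL (m.length : Int)).filter (fun c => decide (getIJ m c.1 c.2 ≠ 0))

-- number of grid cells not yet visited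
def unvis (m : List (List Int)) (V : List (Int × Int)) : Nat :=
  ((gcells m.length).filter (fun c => decide (c ∉ V))).length

-- worklist invariant of A's BFS
def WInv (m : List (List Int)) (V q : List (Int × Int)) : Prop :=
  V.Nodup ∧ q.Nodup ∧ (∀ c ∈ q, c ∈ V) ∧ (∀ c ∈ V, IceP m c) ∧
  (∀ c ∈ V, c ∉ q → ∀ d, AdjP m c d → d ∈ V)

-- what a finished worklist run from (V, q, size) produces
def RunOut (m : List (List Int)) (V q : List (Int × Int)) (size : Int)
    (F : List (Int × Int)) (sz : Int) : Prop :=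
  (V <+: F) ∧ F.Nodup ∧ (∀ c ∈ F, IceP m c) ∧
  (∀ c ∈ F, c ∈ V ∨ ∃ w ∈ q, ReachP m w c) ∧
  (∀ c ∈ F, ∀ d, AdjP m c d → d ∈ F) ∧
  sz = size + q.length + ((F.length : Int) - (V.length : Int))

-- the size of the connected component of c
noncomputable def csN (m : List (List Int)) (c : Int × Int) : Nat :=
  {d | ReachP m c d}.ncard

-- v is the size of the largest ice component (0 when there is none)
def MaxSpec (m : List (List Int)) (v : Int) : Prop :=
  (∀ x, IceP m x → (csN m x : Int) ≤ v) ∧ (v = 0 ∨ ∃ x, IceP m x ∧ v = (csN m x : Int))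

theorem mem_gcells (n : Nat) (c : Int × Int) : c ∈ gcells n ↔ InG (n : Int) c := by
  rw [gcells]
  constructor
  · intro h
    rcases List.mem_flatMap.1 h with ⟨i, hi, hmem⟩
    rcases List.mem_map.1 hmem with ⟨j, hj, hpair⟩
    rw [List.mem_range] at hi hj
    subst hpair
    exact ⟨by omega, by simpa using hi, by omega, by simpa using hj⟩
  · rintro ⟨h1, h2, h3, h4⟩
    refine List.mem_flatMap.2 ⟨c.1.toNat, List.mem_range.2 (by omega), ?_⟩
    refine List.mem_map.2 ⟨c.2.toNat, List.mem_range.2 (by omega), ?_⟩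
    obtain ⟨a, b⟩ := c
    simp only [Prod.mk.injEq]
    constructor <;> simp <;> omega

theorem length_gcells (n : Nat) : (gcells n).length = n * n := by
  simp [gcells]

theorem nodup_gcells (n : Nat) : (gcells n).Nodup := by
  rw [gcells, List.nodup_flatMap]
  constructor
  · intro i _
    exact (List.nodup_range).map (by intro a b h; simpa using h)
  · refine List.Pairwise.imp ?_ (List.nodup_range (n := n))
    intro a b hab z hz hz'
    rcases List.mem_map.1 hz with ⟨j, _, rfl⟩
    rcases List.mem_map.1 hz' with ⟨k, _, h⟩
    have : ((a : Int)) = (b : Int) := congrArg Prod.fst h.symm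
    exact hab (by exact_mod_cast this)

theorem mem_cellsL (n : Int) (c : Int × Int) : c ∈ cellsL n ↔ InG n c := by
  rw [cellsL]
  constructor
  · intro h
    rcases List.mem_flatMap.1 h with ⟨i, hi, hmem⟩
    rcases List.mem_map.1 hmem with ⟨j, hj, hpair⟩
    have hi' := PySem.List.mem_pyRange_one.1 hi
    have hj' := PySem.List.mem_pyRange_one.1 hj
    subst hpair
    exact ⟨hi'.1, hi'.2, hj'.1, hj'.2⟩
  · rintro ⟨h1, h2, h3, h4⟩
    refine List.mem_flatMap.2 ⟨c.1, PySem.List.mem_pyRange_one.2 ⟨h1, h2⟩, ?_⟩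
    exact List.mem_map.2 ⟨c.2, PySem.List.mem_pyRange_one.2 ⟨h3, h4⟩, rfl⟩

theorem nodup_pyRange_one (a b : Int) : (PySem.List.pyRange a b 1).Nodup := by
  have : (PySem.List.pyRange a b 1).Pairwise (· < ·) := by
    rw [List.pairwise_iff_getElem]
    intro i j hi hj hij
    rw [PySem.List.getElem_pyRange_one, PySem.List.getElem_pyRange_one]
    omega
  exact this.imp (fun h => by omega)

theorem nodup_cellsL (n : Int) : (cellsL n).Nodup := by
  rw [cellsL, List.nodup_flatMap]
  constructor
  · intro i _
    exact (nodup_pyRange_one 0 n).map (by intro a b h; simpa using h)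
  · refine List.Pairwise.imp ?_ (nodup_pyRange_one 0 n)
    intro a b hab z hz hz'
    rcases List.mem_map.1 hz with ⟨j, _, rfl⟩
    rcases List.mem_map.1 hz' with ⟨k, _, h⟩
    exact hab (congrArg Prod.fst h.symm)

theorem unvis_le (m : List (List Int)) (V : List (Int × Int)) :
    unvis m V ≤ m.length * m.length := by
  calc ((gcells m.length).filter (fun c => decide (c ∉ V))).length
      ≤ (gcells m.length).length := List.length_filter_le _ _
    _ = m.length * m.length := length_gcells _

theorem unvis_snoc (m : List (List Int)) (V : List (Int × Int)) (x : Int × Int)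
    (hx : x ∉ V) (hg : InG (m.length : Int) x) :
    unvis m (V ++ [x]) + 1 = unvis m V := by
  have hmem : x ∈ (gcells m.length).filter (fun c => decide (c ∉ V)) :=
    List.mem_filter.2 ⟨(mem_gcells _ _).2 hg, by simpa using hx⟩
  have hnd : ((gcells m.length).filter (fun c => decide (c ∉ V))).Nodup :=
    (nodup_gcells _).filter _
  have heq : (gcells m.length).filter (fun c => decide (c ∉ V ++ [x]))
      = ((gcells m.length).filter (fun c => decide (c ∉ V))).filter (fun c => c != x) := by
    rw [List.filter_filter]
    apply List.filter_congr
    intro c _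
    by_cases h1 : c ∈ V <;> by_cases h2 : c = x <;> simp [h1, h2]
  have hpos : 0 < ((gcells m.length).filter (fun c => decide (c ∉ V))).length :=
    List.length_pos_of_mem hmem
  unfold unvis
  rw [heq, ← hnd.erase_eq_filter, List.length_erase_of_mem hmem]
  omega

theorem unvis_append (m : List (List Int)) (Δ : List (Int × Int)) :
    ∀ (V : List (Int × Int)), Δ.Nodup →
    (∀ x ∈ Δ, x ∉ V ∧ InG (m.length : Int) x) →
    unvis m (V ++ Δ) + Δ.length = unvis m V := by
  induction Δ with
  | nil => intro V _ _; simp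
  | cons x Δ' ih =>
    intro V hΔ h
    have hx := h x (by simp)
    have h1 : unvis m ((V ++ [x]) ++ Δ') + Δ'.length = unvis m (V ++ [x]) := by
      apply ih (V ++ [x]) ((List.nodup_cons.1 hΔ).2)
      intro y hy
      rcases h y (by simp [hy]) with ⟨hyV, hyG⟩
      have : y ≠ x := by rintro rfl; exact (List.nodup_cons.1 hΔ).1 hy
      simp [hyV, this, hyG]
    have h2 := unvis_snoc m V x hx.1 hx.2
    have h3 : V ++ x :: Δ' = (V ++ [x]) ++ Δ' := by simp
    rw [h3]
    simp only [List.length_cons]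
    omega

theorem set_add_of_not_mem {x : Int × Int} {s : PySem.Set (Int × Int)} (h : x ∉ s) :
    PySem.Set.add s x = s ++ [x] := by
  simp [PySem.Set.add, PySem.Set.contains, h]

theorem offA (c : Int × Int) : ∀ idx ∈ ([0, 1, 2, 3] : List Int), OffP c (mvA c idx) := by
  intro idx h
  fin_cases h
  · exact Or.inl ⟨by rw [mvA, show PySem.List.pyGetD pvDi 0 0 = -1 from by decide] <;> omega,
      by rw [mvA, show PySem.List.pyGetD pvDj 0 0 = 0 from by decide] <;> omega⟩
  · exact Or.inr (Or.inr (Or.inl ⟨by rw [mvA, show PySem.List.pyGetD pvDi 1 0 = 0 from by decide] <;> omega,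
      by rw [mvA, show PySem.List.pyGetD pvDj 1 0 = -1 from by decide] <;> omega⟩))
  · exact Or.inr (Or.inl ⟨by rw [mvA, show PySem.List.pyGetD pvDi 2 0 = 1 from by decide] <;> omega,
      by rw [mvA, show PySem.List.pyGetD pvDj 2 0 = 0 from by decide] <;> omega⟩)
  · exact Or.inr (Or.inr (Or.inr ⟨by rw [mvA, show PySem.List.pyGetD pvDi 3 0 = 0 from by decide] <;> omega,
      by rw [mvA, show PySem.List.pyGetD pvDj 3 0 = 1 from by decide] <;> omega⟩))

theorem offA_cover (c d : Int × Int) (h : OffP c d) :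
    ∃ idx ∈ ([0, 1, 2, 3] : List Int), d = mvA c idx := by
  rcases h with ⟨h1, h2⟩ | ⟨h1, h2⟩ | ⟨h1, h2⟩ | ⟨h1, h2⟩
  · exact ⟨0, by simp, by
      rw [mvA, show PySem.List.pyGetD pvDi 0 0 = -1 from by decide,
        show PySem.List.pyGetD pvDj 0 0 = 0 from by decide]
      exact Prod.ext (by omega) (by omega)⟩
  · exact ⟨2, by simp, by
      rw [mvA, show PySem.List.pyGetD pvDi 2 0 = 1 from by decide,
        show PySem.List.pyGetD pvDj 2 0 = 0 from by decide]
      exact Prod.ext (by omega) (by omega)⟩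
  · exact ⟨1, by simp, by
      rw [mvA, show PySem.List.pyGetD pvDi 1 0 = 0 from by decide,
        show PySem.List.pyGetD pvDj 1 0 = -1 from by decide]
      exact Prod.ext (by omega) (by omega)⟩
  · exact ⟨3, by simp, by
      rw [mvA, show PySem.List.pyGetD pvDi 3 0 = 0 from by decide,
        show PySem.List.pyGetD pvDj 3 0 = 1 from by decide]
      exact Prod.ext (by omega) (by omega)⟩

theorem foldA_spec (m : List (List Int)) (c : Int × Int) (hc : IceP m c) :
    ∀ (L : List Int), (∀ idx ∈ L, idx ∈ ([0, 1, 2, 3] : List Int)) →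
    ∀ (V W : List (Int × Int)), V.Nodup →
    ∃ Δ, L.foldl (fun s idx =>
        let ni := c.1 + PySem.List.pyGetD pvDi idx 0
        let nj := c.2 + PySem.List.pyGetD pvDj idx 0
        if 0 ≤ ni ∧ ni < (m.length : Int) ∧ 0 ≤ nj ∧ nj < (m.length : Int) ∧ (ni, nj) ∉ s.1 ∧ getIJ m ni nj ≠ 0 then
          (PySem.Set.add s.1 (ni, nj), s.2 ++ [(ni, nj)])
        else s) (V, W) = (V ++ Δ, W ++ Δ) ∧ Δ.Nodup ∧
      (∀ x ∈ Δ, x ∉ V ∧ AdjP m c x) ∧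
      (∀ idx ∈ L, AdjP m c (mvA c idx) → mvA c idx ∈ V ++ Δ) := by
  intro L
  induction L with
  | nil =>
    intro _ V W hV
    exact ⟨[], by simp, List.nodup_nil, by simp, by simp⟩
  | cons idx L' ih =>
    intro hL V W hV
    simp only [List.foldl_cons]
    set ni := c.1 + PySem.List.pyGetD pvDi idx 0 with hni
    set nj := c.2 + PySem.List.pyGetD pvDj idx 0 with hnj
    have hmv : mvA c idx = (ni, nj) := by rw [mvA, ← hni, ← hnj]
    have hoff : OffP c (ni, nj) := hmv ▸ offA c idx (hL idx (by simp))
    have hL' : ∀ i ∈ L', i ∈ ([0, 1, 2, 3] : List Int) := fun i h => hL i (by simp [h])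
    by_cases hg : 0 ≤ ni ∧ ni < (m.length : Int) ∧ 0 ≤ nj ∧ nj < (m.length : Int) ∧
        (ni, nj) ∉ V ∧ getIJ m ni nj ≠ 0
    · rw [if_pos hg]
      obtain ⟨b1, b2, b3, b4, hnv, hval⟩ := hg
      rw [set_add_of_not_mem hnv]
      have hadj : AdjP m c (ni, nj) := ⟨hc, ⟨⟨b1, b2, b3, b4⟩, hval⟩, hoff⟩
      have hVnd : (V ++ [(ni, nj)]).Nodup := by
        rw [List.nodup_append]
        refine ⟨hV, List.nodup_singleton _, ?_⟩
        intro a haV b hb heq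
        rw [List.mem_singleton] at hb
        rw [heq, hb] at haV
        exact hnv haV
      obtain ⟨Δ', hfold, hnd', hprops', hcov'⟩ := ih hL' (V ++ [(ni, nj)]) (W ++ [(ni, nj)]) hVnd
      refine ⟨(ni, nj) :: Δ', ?_, ?_, ?_, ?_⟩
      · rw [hfold, List.append_cons V (ni, nj) Δ', List.append_cons W (ni, nj) Δ']
      · exact List.nodup_cons.2 ⟨fun hmem => ((hprops' _ hmem).1 (by simp)), hnd'⟩
      · intro x hx
        rcases List.mem_cons.1 hx with rfl | hx'
        · exact ⟨hnv, hadj⟩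
        · have := hprops' x hx'
          exact ⟨fun hxx => this.1 (by simp [hxx]), this.2⟩
      · intro idx' hidx' hadj'
        rcases List.mem_cons.1 hidx' with rfl | hmem'
        · rw [hmv]; simp
        · rw [List.append_cons V (ni, nj) Δ']
          exact hcov' idx' hmem' hadj'
    · rw [if_neg hg]
      obtain ⟨Δ, hfold, hnd, hprops, hcov⟩ := ih hL' V W hV
      refine ⟨Δ, hfold, hnd, hprops, ?_⟩
      intro idx' hidx' hadj
      rcases List.mem_cons.1 hidx' with rfl | hmem'
      · rw [hmv] at hadj ⊢
        rcases hadj with ⟨_, ⟨⟨c1, c2, c3, c4⟩, hval⟩, _⟩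
        by_cases hv : (ni, nj) ∈ V
        · exact List.mem_append_left _ hv
        · exact absurd ⟨c1, c2, c3, c4, hv, hval⟩ hg
      · exact hcov idx' hmem' hadj

theorem stepA_spec (m : List (List Int)) (V rest : List (Int × Int)) (c : Int × Int)
    (hV : V.Nodup) (hc : IceP m c) :
    ∃ Δ, bfsStepA m (m.length : Int) (V, rest) c = (V ++ Δ, rest ++ Δ) ∧ Δ.Nodup ∧
      (∀ x ∈ Δ, x ∉ V ∧ AdjP m c x) ∧ (∀ d, AdjP m c d → d ∈ V ++ Δ) := by
  have hPR : (PySem.List.pyRange 0 4 1) = ([0, 1, 2, 3] : List Int) := by decide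
  obtain ⟨Δ, hfold, hnd, hprops, hcov⟩ :=
    foldA_spec m c hc [0, 1, 2, 3] (fun i h => h) V rest hV
  refine ⟨Δ, ?_, hnd, hprops, ?_⟩
  · rw [bfsStepA, hPR]
    exact hfold
  · intro d hadj
    obtain ⟨idx, hidx, hd⟩ := offA_cover c d hadj.2.2
    subst hd
    exact hcov idx hidx hadj

theorem runOut_nil (m : List (List Int)) (V : List (Int × Int)) (size : Int)
    (hInv : WInv m V []) : RunOut m V [] size V size := by
  obtain ⟨hVnd, _, _, hIce, hPC⟩ := hInv
  refine ⟨List.prefix_refl V, hVnd, hIce, fun c hc => Or.inl hc, ?_, by simp⟩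
  intro c hc d hd
  exact hPC c hc (by simp) d hd

theorem runA_spec (m : List (List Int)) :
    ∀ (fuel : Nat) (V q : List (Int × Int)) (size : Int), WInv m V q →
      q.length + unvis m V ≤ fuel →
      RunOut m V q size (bfsA m (m.length : Int) fuel V q size).1
        (bfsA m (m.length : Int) fuel V q size).2 := by
  intro fuel
  induction fuel with
  | zero =>
    intro V q size hInv hμ
    have hq : q = [] := List.length_eq_zero_iff.1 (by omega)
    subst hq
    exact runOut_nil m V size hInv
  | succ fuel ih =>
    intro V q size hInv hμ
    cases q with
    | nil => exact runOut_nil m V size hInv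
    | cons c rest =>
      obtain ⟨hVnd, hqnd, hqV, hIceV, hPC⟩ := hInv
      have hcV : c ∈ V := hqV c (by simp)
      have hcIce : IceP m c := hIceV c hcV
      obtain ⟨Δ, hstep, hnd, hprops, hcov⟩ := stepA_spec m V rest c hVnd hcIce
      have hrw : bfsA m (m.length : Int) (fuel + 1) V (c :: rest) size
          = bfsA m (m.length : Int) fuel (V ++ Δ) (rest ++ Δ) (size + 1) := by
        show bfsA m (m.length : Int) fuel (bfsStepA m (m.length : Int) (V, rest) c).1
          (bfsStepA m (m.length : Int) (V, rest) c).2 (size + 1) = _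
        rw [hstep]
      rw [hrw]
      have hrestnd : rest.Nodup := (List.nodup_cons.1 hqnd).2
      have hdisjV : ∀ x ∈ Δ, x ∉ V := fun x hx => (hprops x hx).1
      have hΔice : ∀ x ∈ Δ, IceP m x := fun x hx => (hprops x hx).2.2.1
      have hΔInG : ∀ x ∈ Δ, x ∉ V ∧ InG (m.length : Int) x :=
        fun x hx => ⟨hdisjV x hx, (hΔice x hx).1⟩
      have hInv' : WInv m (V ++ Δ) (rest ++ Δ) := by
        refine ⟨?_, ?_, ?_, ?_, ?_⟩
        · rw [List.nodup_append]
          exact ⟨hVnd, hnd, fun x hx y hy heq => hdisjV y hy (heq ▸ hx)⟩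
        · rw [List.nodup_append]
          exact ⟨hrestnd, hnd, fun x hx y hy heq =>
            hdisjV y hy (heq ▸ hqV x (by simp [hx]))⟩
        · intro x hx
          rcases List.mem_append.1 hx with hx' | hx'
          · exact List.mem_append_left _ (hqV x (by simp [hx']))
          · exact List.mem_append_right _ hx'
        · intro x hx
          rcases List.mem_append.1 hx with hx' | hx'
          · exact hIceV x hx'
          · exact hΔice x hx'
        · intro z hz hznq d hd
          rcases List.mem_append.1 hz with hz' | hz'
          · by_cases hzc : z = c
            · subst hzc
              exact hcov d hd
            · have : z ∉ rest := fun hmem => hznq (List.mem_append_left _ hmem)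
              have : d ∈ V := hPC z hz' (by simp [hzc, this]) d hd
              exact List.mem_append_left _ this
          · exact absurd (List.mem_append_right rest hz') hznq
      have hcount := unvis_append m Δ V hnd hΔInG
      have hμ' : (rest ++ Δ).length + unvis m (V ++ Δ) ≤ fuel := by
        rw [List.length_append]
        simp only [List.length_cons] at hμ
        omega
      obtain ⟨hpre, hFnd, hFice, hFfrom, hFclosed, hsz⟩ := ih (V ++ Δ) (rest ++ Δ) (size + 1) hInv' hμ'
      refine ⟨(List.prefix_append V Δ).trans hpre, hFnd, hFice, ?_, hFclosed, ?_⟩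
      · intro z hz
        rcases hFfrom z hz with hz' | ⟨w, hw, hreach⟩
        · rcases List.mem_append.1 hz' with h | h
          · exact Or.inl h
          · exact Or.inr ⟨c, by simp, Relation.ReflTransGen.single (hprops z h).2⟩
        · rcases List.mem_append.1 hw with h | h
          · exact Or.inr ⟨w, by simp [h], hreach⟩
          · exact Or.inr ⟨c, by simp,
              (Relation.ReflTransGen.single (hprops w h).2).trans hreach⟩
      · have hlen : (V ++ Δ).length = V.length + Δ.length := List.length_append
        have hlen2 : (rest ++ Δ).length = rest.length + Δ.length := List.length_append
        simp only [List.length_cons]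
        rw [hsz, hlen, hlen2]
        push_cast
        ring

theorem run_mem_iff (m : List (List Int)) (V : List (Int × Int)) (s : Int × Int)
    (F : List (Int × Int)) (sz : Int) (h : RunOut m (V ++ [s]) [s] 0 F sz) (c : Int × Int) :
    c ∈ F ↔ c ∈ V ∨ ReachP m s c := by
  obtain ⟨hpre, _, _, hfrom, hclosed, _⟩ := h
  constructor
  · intro hc
    rcases hfrom c hc with hc' | ⟨w, hw, hr⟩
    · rcases List.mem_append.1 hc' with h | h
      · exact Or.inl h
      · have := List.mem_singleton.1 h
        subst this
        exact Or.inr Relation.ReflTransGen.refl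
    · rw [List.mem_singleton] at hw
      subst hw
      exact Or.inr hr
  · intro hc
    have hsF : s ∈ F := hpre.subset (by simp)
    rcases hc with hc | hr
    · exact hpre.subset (List.mem_append_left _ hc)
    · induction hr with
      | refl => exact hsF
      | tail h1 h2 ih => exact hclosed _ ih _ h2

-- generic fold plumbing --------------------------------------------------------

theorem foldl_pairs {σ : Type} (n : Int) (f : σ → Int → Int → σ) (s : σ) :
    (PySem.List.pyRange 0 n 1).foldl (fun st i =>
      (PySem.List.pyRange 0 n 1).foldl (fun st j => f st i j) st) s
      = (cellsL n).foldl (fun st c => f st c.1 c.2) s := by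
  rw [cellsL, List.foldl_flatMap]
  congr 1
  funext st i
  rw [List.foldl_map]

theorem foldl_prefix_inv {σ γ : Type} (f : σ → γ → σ) (Inv : List γ → σ → Prop)
    (Q : γ → Prop)
    (hstep : ∀ P x s, Q x → x ∉ P → Inv P s → Inv (P ++ [x]) (f s x)) :
    ∀ (L P : List γ) (s : σ), L.Nodup → (∀ x ∈ L, Q x ∧ x ∉ P) → Inv P s →
      Inv (P ++ L) (L.foldl f s) := by
  intro L
  induction L with
  | nil => intro P s _ _ h; simpa using h
  | cons x L' ih =>
    intro P s hnd hQ h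
    have h1 : Inv (P ++ [x]) (f s x) :=
      hstep P x s (hQ x (by simp)).1 (hQ x (by simp)).2 h
    have h2 : Inv ((P ++ [x]) ++ L') (L'.foldl f (f s x)) := by
      apply ih (P ++ [x]) (f s x) (List.nodup_cons.1 hnd).2 ?_ h1
      intro y hy
      refine ⟨(hQ y (by simp [hy])).1, ?_⟩
      intro hmem
      rcases List.mem_append.1 hmem with h' | h'
      · exact (hQ y (by simp [hy])).2 h'
      · rw [List.mem_singleton] at h'
        exact (List.nodup_cons.1 hnd).1 (h' ▸ hy)
    rw [List.foldl_cons, show P ++ x :: L' = (P ++ [x]) ++ L' from by simp]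
    exact h2


-- symmetry / closure facts about reachability ---------------------------------

theorem OffP_symm {c d : Int × Int} (h : OffP c d) : OffP d c := by
  rcases h with ⟨h1, h2⟩ | ⟨h1, h2⟩ | ⟨h1, h2⟩ | ⟨h1, h2⟩
  · exact Or.inr (Or.inl ⟨by omega, by omega⟩)
  · exact Or.inl ⟨by omega, by omega⟩
  · exact Or.inr (Or.inr (Or.inr ⟨by omega, by omega⟩))
  · exact Or.inr (Or.inr (Or.inl ⟨by omega, by omega⟩))

theorem AdjP_symm {m : List (List Int)} {c d : Int × Int} (h : AdjP m c d) : AdjP m d c :=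
  ⟨h.2.1, h.1, OffP_symm h.2.2⟩

theorem ReachP_symm {m : List (List Int)} {c d : Int × Int} (h : ReachP m c d) : ReachP m d c := by
  induction h with
  | refl => exact Relation.ReflTransGen.refl
  | tail _ h2 ih => exact Relation.ReflTransGen.trans (Relation.ReflTransGen.single (AdjP_symm h2)) ih

theorem ReachP_ice {m : List (List Int)} {c d : Int × Int} (hc : IceP m c) (h : ReachP m c d) :
    IceP m d := by
  induction h with
  | refl => exact hc
  | tail _ h2 _ => exact h2.2.1

theorem closed_reach {m : List (List Int)} {V : List (Int × Int)}
    (hcl : ∀ a ∈ V, ∀ d, AdjP m a d → d ∈ V) {c x : Int × Int}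
    (hc : c ∈ V) (h : ReachP m c x) : x ∈ V := by
  induction h with
  | refl => exact hc
  | tail _ h2 ih => exact hcl _ ih _ h2

theorem ncard_eq_list_length {α : Type} [DecidableEq α] (S : Set α) (L : List α)
    (hnd : L.Nodup) (h : ∀ x, x ∈ L ↔ x ∈ S) : S.ncard = L.length := by
  have hS : S = ↑L.toFinset := by ext x; simp [← h]
  rw [hS, Set.ncard_coe_finset, List.toFinset_card_of_nodup hnd]

theorem csN_congr {m : List (List Int)} {c c' : Int × Int} (h : ReachP m c c') :
    csN m c = csN m c' := by
  unfold csN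
  congr 1
  ext x
  exact ⟨fun hx => Relation.ReflTransGen.trans (ReachP_symm h) hx,
    fun hx => Relation.ReflTransGen.trans h hx⟩

theorem csN_pos {m : List (List Int)} {c : Int × Int} (hc : IceP m c) : 1 ≤ csN m c := by
  have hfin : ({d | ReachP m c d}).Finite := by
    apply Set.Finite.subset (gcells m.length).toFinset.finite_toSet
    intro d hd
    have : IceP m d := ReachP_ice hc hd
    simp only [List.coe_toFinset, Set.mem_setOf_eq]
    exact (mem_gcells _ _).2 this.1
  have : ({d | ReachP m c d}).Nonempty := ⟨c, Relation.ReflTransGen.refl⟩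
  exact Set.Nonempty.ncard_pos hfin this

theorem MaxSpec_unique {m : List (List Int)} {u v : Int}
    (hu : MaxSpec m u) (hv : MaxSpec m v) : u = v := by
  obtain ⟨hub, hua⟩ := hu
  obtain ⟨hvb, hva⟩ := hv
  rcases hua with h0 | ⟨x, hx, hux⟩
  · rcases hva with h0' | ⟨y, hy, hvy⟩
    · omega
    · have h1 := hub y hy
      have h2 := csN_pos hy
      omega
  · rcases hva with h0' | ⟨y, hy, hvy⟩
    · have h1 := hvb x hx
      have h2 := csN_pos hx
      omega
    · have h1 := hub y hy
      have h2 := hvb x hx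
      omega

-- A's scan --------------------------------------------------------------------

-- the (maxSize, visited) part of A's per-cell step
def AStep (m : List (List Int)) (st : Int × PySem.Set (Int × Int)) (c : Int × Int) :
    Int × PySem.Set (Int × Int) :=
  if getIJ m c.1 c.2 = 0 ∨ c ∈ st.2 then st
  else
    let r := bfsA m (m.length : Int) (m.length * m.length + 1)
      (PySem.Set.add st.2 c) [c] 0
    (max r.2 st.1, r.1)

def AInv (m : List (List Int)) (P : List (Int × Int)) (st : Int × PySem.Set (Int × Int)) : Prop :=
  st.2.Nodup ∧ (∀ x ∈ st.2, IceP m x) ∧ (∀ c ∈ st.2, ∀ d, AdjP m c d → d ∈ st.2) ∧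
  (∀ x, x ∈ st.2 ↔ ∃ c ∈ P, IceP m c ∧ ReachP m c x) ∧
  (∀ c ∈ P, IceP m c → (csN m c : Int) ≤ st.1) ∧
  (st.1 = 0 ∨ ∃ c ∈ P, IceP m c ∧ st.1 = (csN m c : Int))

theorem AStep_inv (m : List (List Int)) (P : List (Int × Int)) (c : Int × Int)
    (st : Int × PySem.Set (Int × Int)) (hc : InG (m.length : Int) c)
    (h : AInv m P st) : AInv m (P ++ [c]) (AStep m st c) := by
  obtain ⟨hnd, hice, hcl, hiff, hbd, hat⟩ := h
  by_cases hcase : getIJ m c.1 c.2 = 0 ∨ c ∈ st.2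
  · rw [AStep, if_pos hcase]
    have hiff' : ∀ x, x ∈ st.2 ↔ ∃ c' ∈ P ++ [c], IceP m c' ∧ ReachP m c' x := by
      intro x
      rw [hiff x]
      constructor
      · rintro ⟨c', hc', h1, h2⟩
        exact ⟨c', List.mem_append_left _ hc', h1, h2⟩
      · rintro ⟨c', hc', h1, h2⟩
        rcases List.mem_append.1 hc' with h' | h'
        · exact ⟨c', h', h1, h2⟩
        · rw [List.mem_singleton] at h'
          subst h'
          rcases hcase with h0 | hV
          · exact absurd h0 h1.2
          · exact (hiff x).1 (closed_reach hcl hV h2)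
    refine ⟨hnd, hice, hcl, hiff', ?_, ?_⟩
    · intro c' hc' h1
      rcases List.mem_append.1 hc' with h' | h'
      · exact hbd c' h' h1
      · rw [List.mem_singleton] at h'
        subst h'
        rcases hcase with h0 | hV
        · exact absurd h0 h1.2
        · obtain ⟨c0, hc0, hic0, hr0⟩ := (hiff c').1 hV
          have : csN m c0 = csN m c' := csN_congr hr0
          have hb := hbd c0 hc0 hic0
          omega
    · rcases hat with h0 | ⟨c0, hc0, h1, h2⟩
      · exact Or.inl h0
      · exact Or.inr ⟨c0, List.mem_append_left _ hc0, h1, h2⟩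
  · push_neg at hcase
    obtain ⟨hval, hnv⟩ := hcase
    rw [AStep, if_neg (by push_neg; exact ⟨hval, hnv⟩)]
    have hcIce : IceP m c := ⟨hc, hval⟩
    have hadd : PySem.Set.add st.2 c = st.2 ++ [c] := set_add_of_not_mem hnv
    have hInv1 : WInv m (st.2 ++ [c]) [c] := by
      refine ⟨?_, List.nodup_singleton _, ?_, ?_, ?_⟩
      · rw [List.nodup_append]
        refine ⟨hnd, List.nodup_singleton _, ?_⟩
        intro a haV b hb heq
        rw [List.mem_singleton] at hb
        rw [heq, hb] at haV
        exact hnv haV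
      · intro x hx
        rw [List.mem_singleton] at hx
        subst hx
        simp
      · intro x hx
        rcases List.mem_append.1 hx with h' | h'
        · exact hice x h'
        · rw [List.mem_singleton] at h'
          subst h'
          exact hcIce
      · intro z hz hznq d hd
        rcases List.mem_append.1 hz with h' | h'
        · exact List.mem_append_left _ (hcl z h' d hd)
        · exact absurd (List.mem_singleton.2 (List.mem_singleton.1 h')) hznq
    have hμ : ([c] : List (Int × Int)).length + unvis m (st.2 ++ [c])
        ≤ m.length * m.length + 1 := by
      have h1 := unvis_snoc m st.2 c hnv hc
      have h2 := unvis_le m st.2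
      simp only [List.length_singleton]
      omega
    have hRun := runA_spec m (m.length * m.length + 1) (st.2 ++ [c]) [c] 0 hInv1 hμ
    rw [hadd]
    show AInv m (P ++ [c])
      (max (bfsA m (m.length : Int) (m.length * m.length + 1) (st.2 ++ [c]) [c] 0).2 st.1,
        (bfsA m (m.length : Int) (m.length * m.length + 1) (st.2 ++ [c]) [c] 0).1)
    set r := bfsA m (m.length : Int) (m.length * m.length + 1) (st.2 ++ [c]) [c] 0 with hr
    have hmem := run_mem_iff m st.2 c r.1 r.2 hRun
    obtain ⟨hpre, hFnd, hFice, _, hFcl, hsz⟩ := hRun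
    -- the component of c is exactly the fresh part of the visited set
    have hdisj : ∀ x, ReachP m c x → x ∉ st.2 := by
      intro x hx hmemV
      exact hnv (closed_reach hcl hmemV (ReachP_symm hx))
    have hVsubF : ∀ x ∈ st.2, x ∈ r.1 := by
      intro x hx
      exact hpre.subset (List.mem_append_left _ hx)
    have hcls : {d | ReachP m c d} = ↑r.1.toFinset \ ↑st.2.toFinset := by
      ext x
      simp only [Set.mem_setOf_eq, Set.mem_diff, List.coe_toFinset, Set.mem_setOf_eq]
      constructor
      · intro hx
        exact ⟨(hmem x).2 (Or.inr hx), hdisj x hx⟩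
      · rintro ⟨h1, h2⟩
        rcases (hmem x).1 h1 with h' | h'
        · exact absurd h' h2
        · exact h'
    have hsubF : st.2.toFinset ⊆ r.1.toFinset := by
      intro x hx
      rw [List.mem_toFinset] at hx ⊢
      exact hVsubF x hx
    have hcard : csN m c = r.1.length - st.2.length := by
      rw [csN, hcls, ← Finset.coe_sdiff, Set.ncard_coe_finset,
        Finset.card_sdiff_of_subset hsubF, List.toFinset_card_of_nodup hFnd,
        List.toFinset_card_of_nodup hnd]
    have hlenle : st.2.length + 1 ≤ r.1.length := by
      have := hpre.length_le
      simp only [List.length_append, List.length_singleton] at this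
      omega
    have hszc : r.2 = (csN m c : Int) := by
      rw [hsz, hcard]
      simp only [List.length_singleton, List.length_append]
      push_cast [Nat.cast_sub (by omega : st.2.length ≤ r.1.length)]
      ring
    refine ⟨hFnd, hFice, hFcl, ?_, ?_, ?_⟩
    · intro x
      rw [hmem x]
      constructor
      · rintro (hV | hR)
        · obtain ⟨c', hc', h1, h2⟩ := (hiff x).1 hV
          exact ⟨c', List.mem_append_left _ hc', h1, h2⟩
        · exact ⟨c, List.mem_append_right _ (by simp), hcIce, hR⟩
      · rintro ⟨c', hc', h1, h2⟩
        rcases List.mem_append.1 hc' with h' | h'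
        · exact Or.inl ((hiff x).2 ⟨c', h', h1, h2⟩)
        · rw [List.mem_singleton] at h'
          subst h'
          exact Or.inr h2
    · intro c' hc' h1
      rcases List.mem_append.1 hc' with h' | h'
      · exact le_trans (hbd c' h' h1) (le_max_right _ _)
      · rw [List.mem_singleton] at h'
        subst h'
        rw [← hszc]
        exact le_max_left _ _
    · by_cases hle : st.1 ≤ r.2
      · rw [max_eq_left hle]
        exact Or.inr ⟨c, List.mem_append_right _ (by simp), hcIce, hszc⟩
      · rw [max_eq_right (by omega)]
        rcases hat with h0 | ⟨c0, hc0, h1, h2⟩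
        · exact Or.inl h0
        · exact Or.inr ⟨c0, List.mem_append_left _ hc0, h1, h2⟩

theorem A_scan (m : List (List Int)) :
    AInv m (cellsL (m.length : Int))
      ((cellsL (m.length : Int)).foldl (AStep m) ((0 : Int), (PySem.Set.empty : PySem.Set (Int × Int)))) := by
  have h := foldl_prefix_inv (AStep m) (AInv m) (InG (m.length : Int))
    (fun P x s hx _ hs => AStep_inv m P x s hx hs)
    (cellsL (m.length : Int)) [] ((0 : Int), PySem.Set.empty)
    (nodup_cellsL _) (fun x hx => ⟨(mem_cellsL _ _).1 hx, by simp⟩) ?_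
  · simpa using h
  · refine ⟨List.nodup_nil, by simp, by simp, ?_, by simp, Or.inl rfl⟩
    intro x
    constructor
    · intro hx
      simp [PySem.Set.empty] at hx
    · rintro ⟨c, hc, _⟩
      simp at hc

theorem A_MaxSpec (m : List (List Int)) :
    MaxSpec m ((cellsL (m.length : Int)).foldl (AStep m) ((0 : Int), PySem.Set.empty)).1 := by
  obtain ⟨_, _, _, _, hbd, hat⟩ := A_scan m
  constructor
  · intro x hx
    exact hbd x ((mem_cellsL _ _).2 hx.1) hx
  · rcases hat with h0 | ⟨c0, _, h1, h2⟩
    · exact Or.inl h0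
    · exact Or.inr ⟨c0, h1, h2⟩


-- equivalence-closure utilities ------------------------------------------------

theorem eqvGen_false {α : Type} {x y : α} (h : Relation.EqvGen (fun _ _ => False) x y) :
    x = y := by
  induction h with
  | rel _ _ h => exact h.elim
  | refl => rfl
  | symm _ _ _ ih => exact ih.symm
  | trans _ _ _ _ _ ih1 ih2 => exact ih1.trans ih2

theorem eqvGen_congr {α : Type} {E E' : α → α → Prop} (h : ∀ x y, E x y ↔ E' x y)
    {x y : α} (hE : Relation.EqvGen E x y) : Relation.EqvGen E' x y :=
  Relation.EqvGen.mono (fun a b hab => (h a b).1 hab) hE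

theorem eqvGen_add_iff {α : Type} (E : α → α → Prop) (a b x y : α) :
    Relation.EqvGen (fun u v => E u v ∨ (u = a ∧ v = b)) x y ↔
      Relation.EqvGen E x y ∨ (Relation.EqvGen E x a ∧ Relation.EqvGen E b y) ∨
        (Relation.EqvGen E x b ∧ Relation.EqvGen E a y) := by
  constructor
  · intro h
    induction h with
    | rel u v huv =>
      rcases huv with h' | ⟨rfl, rfl⟩
      · exact Or.inl (Relation.EqvGen.rel _ _ h')
      · exact Or.inr (Or.inl ⟨Relation.EqvGen.refl _, Relation.EqvGen.refl _⟩)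
    | refl => exact Or.inl (Relation.EqvGen.refl _)
    | symm u v _ ih =>
      rcases ih with h' | ⟨h1, h2⟩ | ⟨h1, h2⟩
      · exact Or.inl (Relation.EqvGen.symm _ _ h')
      · exact Or.inr (Or.inr ⟨Relation.EqvGen.symm _ _ h2, Relation.EqvGen.symm _ _ h1⟩)
      · exact Or.inr (Or.inl ⟨Relation.EqvGen.symm _ _ h2, Relation.EqvGen.symm _ _ h1⟩)
    | trans u v w _ _ ih1 ih2 =>
      rcases ih1 with h' | ⟨h1, h2⟩ | ⟨h1, h2⟩ <;> rcases ih2 with h'' | ⟨h1', h2'⟩ | ⟨h1', h2'⟩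
      · exact Or.inl (Relation.EqvGen.trans _ _ _ h' h'')
      · exact Or.inr (Or.inl ⟨Relation.EqvGen.trans _ _ _ h' h1', h2'⟩)
      · exact Or.inr (Or.inr ⟨Relation.EqvGen.trans _ _ _ h' h1', h2'⟩)
      · exact Or.inr (Or.inl ⟨h1, Relation.EqvGen.trans _ _ _ h2 h''⟩)
      · exact Or.inl (Relation.EqvGen.trans _ _ _ h1
          (Relation.EqvGen.trans _ _ _
            (Relation.EqvGen.symm _ _ (Relation.EqvGen.trans _ _ _ h2 h1')) h2'))
      · exact Or.inl (Relation.EqvGen.trans _ _ _ h1 h2')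
      · exact Or.inr (Or.inr ⟨h1, Relation.EqvGen.trans _ _ _ h2 h''⟩)
      · exact Or.inl (Relation.EqvGen.trans _ _ _ h1 h2')
      · exact Or.inr (Or.inr ⟨h1, h2'⟩)
  · intro h
    have hab : Relation.EqvGen (fun u v => E u v ∨ (u = a ∧ v = b)) a b :=
      Relation.EqvGen.rel _ _ (Or.inr ⟨rfl, rfl⟩)
    have lift : ∀ {p q : α}, Relation.EqvGen E p q →
        Relation.EqvGen (fun u v => E u v ∨ (u = a ∧ v = b)) p q :=
      fun h' => Relation.EqvGen.mono (fun _ _ hh => Or.inl hh) h'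
    rcases h with h' | ⟨h1, h2⟩ | ⟨h1, h2⟩
    · exact lift h'
    · exact Relation.EqvGen.trans _ _ _ (Relation.EqvGen.trans _ _ _ (lift h1) hab) (lift h2)
    · exact Relation.EqvGen.trans _ _ _
        (Relation.EqvGen.trans _ _ _ (lift h1) (Relation.EqvGen.symm _ _ hab)) (lift h2)

theorem adj_dr {m : List (List Int)} {c d : Int × Int} (h : AdjP m c d) :
    DR m c d ∨ DR m d c := by
  rcases h.2.2 with ⟨h1, h2⟩ | ⟨h1, h2⟩ | ⟨h1, h2⟩ | ⟨h1, h2⟩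
  · exact Or.inr ⟨AdjP_symm h, Or.inl ⟨by omega, by omega⟩⟩
  · exact Or.inl ⟨h, Or.inl ⟨h1, h2⟩⟩
  · exact Or.inr ⟨AdjP_symm h, Or.inr ⟨by omega, by omega⟩⟩
  · exact Or.inl ⟨h, Or.inr ⟨h1, h2⟩⟩

theorem eqvGen_dr_iff {m : List (List Int)} {x y : Int × Int} :
    Relation.EqvGen (DR m) x y ↔ ReachP m x y := by
  constructor
  · intro h
    induction h with
    | rel u v huv => exact Relation.ReflTransGen.single huv.1
    | refl => exact Relation.ReflTransGen.refl
    | symm _ _ _ ih => exact ReachP_symm ih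
    | trans _ _ _ _ _ ih1 ih2 => exact ih1.trans ih2
  · intro h
    induction h with
    | refl => exact Relation.EqvGen.refl _
    | tail _ h2 ih =>
      rcases adj_dr h2 with h' | h'
      · exact Relation.EqvGen.trans _ _ _ ih (Relation.EqvGen.rel _ _ h')
      · exact Relation.EqvGen.trans _ _ _ ih (Relation.EqvGen.symm _ _ (Relation.EqvGen.rel _ _ h'))

-- union-find ghost structure ---------------------------------------------------

theorem mem_icelist (m : List (List Int)) (x : Int × Int) :
    x ∈ icelist m ↔ IceP m x := by
  rw [icelist, List.mem_filter, mem_cellsL]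
  constructor
  · rintro ⟨h1, h2⟩
    exact ⟨h1, by simpa using h2⟩
  · rintro ⟨h1, h2⟩
    exact ⟨h1, by simpa using h2⟩

theorem nodup_icelist (m : List (List Int)) : (icelist m).Nodup :=
  (nodup_cellsL _).filter _

theorem filter_len_pos {I : List (Int × Int)} {r : (Int × Int) → (Int × Int)} {a : Int × Int}
    (ha : a ∈ I) : 1 ≤ (I.filter (fun y => decide (r y = r a))).length :=
  List.length_pos_of_mem (List.mem_filter.2 ⟨ha, by simp⟩)

theorem len_filter_or_disjoint {α : Type} (l : List α) (P Q : α → Prop)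
    [DecidablePred P] [DecidablePred Q] (h : ∀ x, ¬(P x ∧ Q x)) :
    (l.filter (fun y => decide (P y ∨ Q y))).length
      = (l.filter (fun y => decide (P y))).length + (l.filter (fun y => decide (Q y))).length := by
  induction l with
  | nil => rfl
  | cons x t ih =>
    by_cases h1 : P x <;> by_cases h2 : Q x
    · exact absurd ⟨h1, h2⟩ (h x)
    · rw [List.filter_cons_of_pos (by simp [h1]), List.filter_cons_of_pos (by simp [h1]),
        List.filter_cons_of_neg (by simp [h2])]
      simp only [List.length_cons]
      omega
    · rw [List.filter_cons_of_pos (by simp [h2]), List.filter_cons_of_neg (by simp [h1]),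
        List.filter_cons_of_pos (by simp [h2])]
      simp only [List.length_cons]
      omega
    · rw [List.filter_cons_of_neg (by simp [h1, h2]), List.filter_cons_of_neg (by simp [h1]),
        List.filter_cons_of_neg (by simp [h2])]
      exact ih

-- the forest invariant: r is the root map, dh a strictly decreasing depth measure
def Root (p : PySem.Dict (Int × Int) (Int × Int)) (r : (Int × Int) → (Int × Int))
    (dh : (Int × Int) → Nat) (I : List (Int × Int)) : Prop :=
  ∀ x ∈ I, p.getD x x ∈ I ∧ (p.getD x x = x → r x = x) ∧
    (p.getD x x ≠ x → r (p.getD x x) = r x ∧ dh (p.getD x x) < dh x) ∧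
    r x ∈ I ∧ p.getD (r x) (r x) = r x ∧
    dh x < (I.filter (fun y => decide (r y = r x))).length

theorem root_idem {p : PySem.Dict (Int × Int) (Int × Int)} {r : (Int × Int) → (Int × Int)}
    {dh : (Int × Int) → Nat} {I : List (Int × Int)} (hR : Root p r dh I)
    {x : Int × Int} (hx : x ∈ I) : r (r x) = r x :=
  (hR (r x) (hR x hx).2.2.2.1).2.1 (hR x hx).2.2.2.2.1

theorem ufFind_eq {p : PySem.Dict (Int × Int) (Int × Int)} {r : (Int × Int) → (Int × Int)}
    {dh : (Int × Int) → Nat} {I : List (Int × Int)} (hR : Root p r dh I) :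
    ∀ (f : Nat) (x : Int × Int), x ∈ I → dh x < f → ufFind p f x = r x := by
  intro f
  induction f with
  | zero => intro x _ h; omega
  | succ f ih =>
    intro x hx h
    obtain ⟨hpx, hfix, hstep, _, _, _⟩ := hR x hx
    show (if p.getD x x = x then x else ufFind p f (p.getD x x)) = r x
    by_cases he : p.getD x x = x
    · rw [if_pos he]
      exact (hfix he).symm
    · rw [if_neg he]
      obtain ⟨hrpx, hdh⟩ := hstep he
      rw [ih (p.getD x x) hpx (by omega), hrpx]

-- the union-find invariant of B's second phase, relative to the processed edge relation E
def UFInv (m : List (List Int)) (E : (Int × Int) → (Int × Int) → Prop)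
    (st : PySem.Dict (Int × Int) (Int × Int) × PySem.Dict (Int × Int) Int × Int) : Prop :=
  ∃ r dh, st.1.keys = icelist m ∧ st.2.1.keys = icelist m ∧ Root st.1 r dh (icelist m) ∧
    (∀ x ∈ icelist m, ∀ y ∈ icelist m, (r x = r y ↔ Relation.EqvGen E x y)) ∧
    (∀ ρ ∈ icelist m, r ρ = ρ →
      st.2.1.getD ρ 0 = ((((icelist m).filter (fun y => decide (r y = r ρ))).length : Nat) : Int)) ∧
    (∀ x ∈ icelist m,
      ((((icelist m).filter (fun y => decide (r y = r x))).length : Nat) : Int) ≤ st.2.2) ∧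
    (st.2.2 = 0 ∨ ∃ x ∈ icelist m,
      st.2.2 = ((((icelist m).filter (fun y => decide (r y = r x))).length : Nat) : Int))

theorem UFInv_congr {m : List (List Int)} {E E' : (Int × Int) → (Int × Int) → Prop}
    {st : PySem.Dict (Int × Int) (Int × Int) × PySem.Dict (Int × Int) Int × Int}
    (hEE : ∀ x y, E x y ↔ E' x y) (h : UFInv m E st) : UFInv m E' st := by
  obtain ⟨r, dh, h1, h2, h3, h4, h5, h6, h7⟩ := h
  refine ⟨r, dh, h1, h2, h3, ?_, h5, h6, h7⟩
  intro x hx y hy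
  rw [h4 x hx y hy]
  exact ⟨eqvGen_congr hEE, eqvGen_congr (fun a b => (hEE a b).symm)⟩

theorem dict_size_eq_keys_length {κ ν : Type} [BEq κ] (d : PySem.Dict κ ν) :
    d.size = d.keys.length := by
  simp [PySem.Dict.size, PySem.Dict.keys]


theorem redirect_iff {α : Type} [DecidableEq α] (ra rb u v : α) (hne : ra ≠ rb) :
    ((if u = rb then ra else u) = (if v = rb then ra else v)) ↔
      (u = v ∨ (u = ra ∧ v = rb) ∨ (u = rb ∧ v = ra)) := by
  split_ifs with h1 h2 h2
  · constructor
    · intro _; exact Or.inl (h1.trans h2.symm)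
    · intro _; rfl
  · constructor
    · intro h'; exact Or.inr (Or.inr ⟨h1, h'.symm⟩)
    · rintro (h' | ⟨h3, h4⟩ | ⟨h3, h4⟩)
      · exact absurd (h'.symm.trans h1) h2
      · exact absurd h4 h2
      · exact h4.symm
  · constructor
    · intro h'; exact Or.inr (Or.inl ⟨h', h2⟩)
    · rintro (h' | ⟨h3, h4⟩ | ⟨h3, h4⟩)
      · exact absurd (h'.trans h2) h1
      · exact h3
      · exact absurd h3 h1
  · constructor
    · intro h'; exact Or.inl h'
    · rintro (h' | ⟨h3, h4⟩ | ⟨h3, h4⟩)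
      · exact h'
      · exact absurd h4 h2
      · exact absurd h3 h1

theorem flt_merge (I : List (Int × Int)) (r : (Int × Int) → (Int × Int)) (a b : Int × Int)
    (hne : r a ≠ r b) :
    (I.filter (fun y => decide ((if r y = r b then r a else r y) = r a))).length
      = (I.filter (fun y => decide (r y = r a))).length
        + (I.filter (fun y => decide (r y = r b))).length := by
  rw [← len_filter_or_disjoint I (fun y => r y = r a) (fun y => r y = r b)
    (fun y hy => hne (hy.1.symm.trans hy.2))]
  apply congrArg List.length
  apply List.filter_congr
  intro y _
  apply decide_eq_decide.2
  by_cases hy : r y = r b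
  · rw [if_pos hy]
    simp [hy]
  · rw [if_neg hy]
    simp [hy]

theorem flt_other (I : List (Int × Int)) (r : (Int × Int) → (Int × Int)) (a b ρ : Int × Int)
    (h1 : ρ ≠ r a) (h2 : ρ ≠ r b) :
    I.filter (fun y => decide ((if r y = r b then r a else r y) = ρ))
      = I.filter (fun y => decide (r y = ρ)) := by
  apply List.filter_congr
  intro y _
  apply decide_eq_decide.2
  by_cases hy : r y = r b
  · rw [if_pos hy]
    constructor
    · intro h'; exact absurd h'.symm h1
    · intro h'; exact absurd (hy.symm.trans h').symm h2
  · rw [if_neg hy]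

theorem flt_class (I : List (Int × Int)) (r : (Int × Int) → (Int × Int)) (a b x : Int × Int)
    (hne : r a ≠ r b) :
    (I.filter (fun y => decide ((if r y = r b then r a else r y)
        = (if r x = r b then r a else r x)))).length
      = if r x = r a ∨ r x = r b
        then (I.filter (fun y => decide (r y = r a))).length
          + (I.filter (fun y => decide (r y = r b))).length
        else (I.filter (fun y => decide (r y = r x))).length := by
  by_cases hcase : r x = r a ∨ r x = r b
  · rw [if_pos hcase]
    have hx : (if r x = r b then r a else r x) = r a := by
      rcases hcase with h' | h'
      · rw [if_neg (by rw [h']; exact hne), h']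
      · rw [if_pos h']
    rw [hx, flt_merge I r a b hne]
  · rw [if_neg hcase]
    push_neg at hcase
    have hx : (if r x = r b then r a else r x) = r x := by rw [if_neg hcase.2]
    rw [hx, flt_other I r a b (r x) hcase.1 hcase.2]

theorem union_root {p : PySem.Dict (Int × Int) (Int × Int)} {r : (Int × Int) → (Int × Int)}
    {dh : (Int × Int) → Nat} {I : List (Int × Int)} (hR : Root p r dh I)
    {a b : Int × Int} (ha : a ∈ I) (hb : b ∈ I) (hne : r a ≠ r b) :
    Root (p.insert (r b) (r a)) (fun x => if r x = r b then r a else r x)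
      (fun x => if r x = r b then dh x + dh (r a) + 1 else dh x) I := by
  have hraI : r a ∈ I := (hR a ha).2.2.2.1
  have hrbI : r b ∈ I := (hR b hb).2.2.2.1
  have hidra : r (r a) = r a := root_idem hR ha
  have hidrb : r (r b) = r b := root_idem hR hb
  have hfra : p.getD (r a) (r a) = r a := (hR a ha).2.2.2.2.1
  have hdra : dh (r a) < (I.filter (fun y => decide (r y = r a))).length := by
    have h' := (hR (r a) hraI).2.2.2.2.2
    rwa [hidra] at h'
  have hdrb : dh (r b) < (I.filter (fun y => decide (r y = r b))).length := by
    have h' := (hR (r b) hrbI).2.2.2.2.2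
    rwa [hidrb] at h'
  intro x hx
  obtain ⟨hpxI, hfix, hstep, hrxI, hrfix, hdbd⟩ := hR x hx
  have hgx : (p.insert (r b) (r a)).getD x x = if x = r b then r a else p.getD x x :=
    PySem.Dict.getD_insert _ _ _ _ _
  dsimp only
  -- the new class bound, shared by all branches
  have hbound : (if r x = r b then dh x + dh (r a) + 1 else dh x)
      < (I.filter (fun y => decide ((if r y = r b then r a else r y)
          = (if r x = r b then r a else r x)))).length := by
    rw [flt_class I r a b x hne]
    by_cases hxb : r x = r b
    · rw [if_pos hxb, if_pos (Or.inr hxb)]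
      have hdx : dh x < (I.filter (fun y => decide (r y = r b))).length := by
        rw [← hxb]; exact hdbd
      omega
    · rw [if_neg hxb]
      by_cases hxa : r x = r a
      · rw [if_pos (Or.inl hxa)]
        have hdx : dh x < (I.filter (fun y => decide (r y = r a))).length := by
          rw [← hxa]; exact hdbd
        omega
      · rw [if_neg (by push_neg; exact ⟨hxa, hxb⟩)]
        exact hdbd
  by_cases hxrb : x = r b
  · -- x is the old root of b's class: its new parent is r a
    subst hxrb
    have hgx' : (p.insert (r b) (r a)).getD (r b) (r b) = r a := by
      rw [hgx, if_pos rfl]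
    have hrb' : (if r (r b) = r b then r a else r (r b)) = r a := by
      rw [hidrb, if_pos rfl]
    refine ⟨?_, ?_, ?_, ?_, ?_, hbound⟩
    · rw [hgx']; exact hraI
    · intro h'
      exact absurd (hgx'.symm.trans h') hne
    · intro _
      rw [hgx']
      constructor
      · rw [hidra, hidrb, if_neg hne, if_pos rfl]
      · rw [hidra, hidrb, if_neg hne, if_pos rfl]
        omega
    · rw [hrb']; exact hraI
    · rw [hrb', PySem.Dict.getD_insert, if_neg hne]
      exact hfra
  · have hgx' : (p.insert (r b) (r a)).getD x x = p.getD x x := by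
      rw [hgx, if_neg hxrb]
    by_cases hxb : r x = r b
    · -- x lies in b's class and is not its root
      have hpne : p.getD x x ≠ x := by
        intro h'
        exact hxrb ((hfix h').symm.trans hxb)
      obtain ⟨hrpx, hdh2⟩ := hstep hpne
      refine ⟨?_, ?_, ?_, ?_, ?_, hbound⟩
      · rw [hgx']; exact hpxI
      · intro h'
        exact absurd (hgx'.symm.trans h') hpne
      · intro _
        rw [hgx']
        constructor
        · rw [hrpx]
        · rw [hrpx, if_pos hxb, if_pos hxb]
          omega
      · rw [if_pos hxb]
        exact hraI
      · rw [if_pos hxb, PySem.Dict.getD_insert, if_neg hne]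
        exact hfra
    · -- x is outside b's class: nothing changes
      refine ⟨?_, ?_, ?_, ?_, ?_, hbound⟩
      · rw [hgx']; exact hpxI
      · intro h'
        rw [if_neg hxb]
        exact hfix (hgx'.symm.trans h')
      · intro h'
        have hpne : p.getD x x ≠ x := fun hh => h' (hgx'.trans hh)
        obtain ⟨hrpx, hdh2⟩ := hstep hpne
        rw [hgx']
        constructor
        · rw [hrpx]
        · rw [hrpx, if_neg hxb, if_neg hxb]
          exact hdh2
      · rw [if_neg hxb]
        exact hrxI
      · rw [if_neg hxb, PySem.Dict.getD_insert, if_neg hxb]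
        exact hrfix

theorem ufUnite_inv (m : List (List Int)) (E : (Int × Int) → (Int × Int) → Prop)
    (st : PySem.Dict (Int × Int) (Int × Int) × PySem.Dict (Int × Int) Int × Int)
    (a b : Int × Int) (ha : a ∈ icelist m) (hb : b ∈ icelist m) (h : UFInv m E st) :
    UFInv m (fun u v => E u v ∨ (u = a ∧ v = b)) (ufUnite st a b) := by
  obtain ⟨r, dh, hpk, hsk, hR, hsem, hszc, hbd, hat⟩ := h
  have hfuel : ∀ x ∈ icelist m, dh x < st.1.size + 1 := by
    intro x hx
    have h1 := (hR x hx).2.2.2.2.2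
    have h2 := List.length_filter_le (fun y => decide (r y = r x)) (icelist m)
    rw [dict_size_eq_keys_length, hpk]
    omega
  have hfa : ufFind st.1 (st.1.size + 1) a = r a := ufFind_eq hR _ a ha (hfuel a ha)
  have hfb : ufFind st.1 (st.1.size + 1) b = r b := ufFind_eq hR _ b hb (hfuel b hb)
  have hraI : r a ∈ icelist m := (hR a ha).2.2.2.1
  have hrbI : r b ∈ icelist m := (hR b hb).2.2.2.1
  have hidra : r (r a) = r a := root_idem hR ha
  have hidrb : r (r b) = r b := root_idem hR hb
  by_cases hrarb : r a = r b
  · -- the two cells are already in one class: nothing changes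
    have hun : ufUnite st a b = st := by
      simp only [ufUnite, hfa, hfb]
      rw [if_neg (fun hh => hh hrarb)]
    rw [hun]
    have hEab : Relation.EqvGen E a b := (hsem a ha b hb).1 hrarb
    refine ⟨r, dh, hpk, hsk, hR, ?_, hszc, hbd, hat⟩
    intro x hx y hy
    rw [hsem x hx y hy]
    constructor
    · exact fun h' => Relation.EqvGen.mono (fun u v hh => Or.inl hh) h'
    · intro h'
      rcases (eqvGen_add_iff E a b x y).1 h' with h'' | ⟨h1, h2⟩ | ⟨h1, h2⟩
      · exact h''
      · exact Relation.EqvGen.trans _ _ _ (Relation.EqvGen.trans _ _ _ h1 hEab) h2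
      · exact Relation.EqvGen.trans _ _ _
          (Relation.EqvGen.trans _ _ _ h1 (Relation.EqvGen.symm _ _ hEab)) h2
  · -- genuine union: b's root is hung under a's root
    have hsa : st.2.1.getD (r a) 0
        = ((((icelist m).filter (fun y => decide (r y = r a))).length : Nat) : Int) := by
      have h' := hszc (r a) hraI hidra
      rwa [hidra] at h'
    have hsb : st.2.1.getD (r b) 0
        = ((((icelist m).filter (fun y => decide (r y = r b))).length : Nat) : Int) := by
      have h' := hszc (r b) hrbI hidrb
      rwa [hidrb] at h'
    have hns : st.2.1.getD (r a) 0 + st.2.1.getD (r b) 0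
        = ((((icelist m).filter (fun y => decide (r y = r a))).length
            + ((icelist m).filter (fun y => decide (r y = r b))).length : Nat) : Int) := by
      rw [hsa, hsb]
      push_cast
      ring
    have hun : ufUnite st a b =
        (st.1.insert (r b) (r a),
         st.2.1.insert (r a) (st.2.1.getD (r a) 0 + st.2.1.getD (r b) 0),
         if st.2.1.getD (r a) 0 + st.2.1.getD (r b) 0 > st.2.2
           then st.2.1.getD (r a) 0 + st.2.1.getD (r b) 0 else st.2.2) := by
      simp only [ufUnite, hfa, hfb]
      rw [if_pos hrarb]
    rw [hun]
    refine ⟨fun x => if r x = r b then r a else r x,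
            fun x => if r x = r b then dh x + dh (r a) + 1 else dh x,
            ?_, ?_, ?_, ?_, ?_, ?_, ?_⟩
    · show (st.1.insert (r b) (r a)).keys = icelist m
      rw [PySem.Dict.keys_insert_of_contains _ _
        ((PySem.Dict.contains_iff_mem_keys _ _).2 (by rw [hpk]; exact hrbI))]
      exact hpk
    · show (st.2.1.insert (r a) _).keys = icelist m
      rw [PySem.Dict.keys_insert_of_contains _ _
        ((PySem.Dict.contains_iff_mem_keys _ _).2 (by rw [hsk]; exact hraI))]
      exact hsk
    · exact union_root hR ha hb hrarb
    · intro x hx y hy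
      dsimp only
      rw [redirect_iff (r a) (r b) (r x) (r y) hrarb, eqvGen_add_iff E a b x y,
        ← hsem x hx y hy, ← hsem x hx a ha, ← hsem b hb y hy, ← hsem x hx b hb,
        ← hsem a ha y hy]
      constructor
      · rintro (h' | ⟨h1, h2⟩ | ⟨h1, h2⟩)
        · exact Or.inl h'
        · exact Or.inr (Or.inl ⟨h1, h2.symm⟩)
        · exact Or.inr (Or.inr ⟨h1, h2.symm⟩)
      · rintro (h' | ⟨h1, h2⟩ | ⟨h1, h2⟩)
        · exact Or.inl h'
        · exact Or.inr (Or.inl ⟨h1, h2.symm⟩)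
        · exact Or.inr (Or.inr ⟨h1, h2.symm⟩)
    · intro ρ hρ hρfix
      dsimp only at hρfix ⊢
      by_cases hρb : r ρ = r b
      · rw [if_pos hρb] at hρfix
        rw [← hρfix] at hρb
        rw [hidra] at hρb
        exact absurd hρb hrarb
      · rw [if_neg hρb] at hρfix
        by_cases hρa : ρ = r a
        · subst hρa
          rw [PySem.Dict.getD_insert, if_pos rfl, hns,
            flt_class (icelist m) r a b (r a) hrarb, if_pos (Or.inl hidra)]
        · have hρnb : ρ ≠ r b := fun hh => hρb (hρfix.trans hh)
          rw [PySem.Dict.getD_insert, if_neg hρa,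
            flt_class (icelist m) r a b ρ hrarb,
            if_neg (by rw [hρfix]; push_neg; exact ⟨hρa, hρnb⟩)]
          exact hszc ρ hρ hρfix
    · intro x hx
      dsimp only
      rw [hns, flt_class (icelist m) r a b x hrarb]
      have h1 := hbd x hx
      have h2 := hbd a ha
      have h3 := hbd b hb
      by_cases hcase : r x = r a ∨ r x = r b
      · rw [if_pos hcase]
        split_ifs <;> push_cast at * <;> omega
      · rw [if_neg hcase]
        split_ifs <;> push_cast at * <;> omega
    · dsimp only
      rw [hns]
      by_cases hgt : ((((icelist m).filter (fun y => decide (r y = r a))).length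
          + ((icelist m).filter (fun y => decide (r y = r b))).length : Nat) : Int) > st.2.2
      · rw [if_pos hgt]
        refine Or.inr ⟨a, ha, ?_⟩
        rw [flt_class (icelist m) r a b a hrarb, if_pos (Or.inl rfl)]
      · rw [if_neg hgt]
        rcases hat with h0 | ⟨x, hx, heq⟩
        · exact Or.inl h0
        · by_cases hcase : r x = r a ∨ r x = r b
          · exfalso
            have h1 := hbd a ha
            have h2 := hbd b hb
            have hA1 : 1 ≤ ((icelist m).filter (fun y => decide (r y = r a))).length :=
              filter_len_pos ha
            have hB1 : 1 ≤ ((icelist m).filter (fun y => decide (r y = r b))).length :=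
              filter_len_pos hb
            rcases hcase with h' | h'
            · rw [h'] at heq
              push_cast at *
              omega
            · rw [h'] at heq
              push_cast at *
              omega
          · refine Or.inr ⟨x, hx, ?_⟩
            rw [flt_class (icelist m) r a b x hrarb, if_neg hcase]
            exact heq

-- B's scan --------------------------------------------------------------------

-- the edges already processed after the scan prefix P
def EP (m : List (List Int)) (P : List (Int × Int)) (u v : Int × Int) : Prop :=
  u ∈ P ∧ DR m u v

-- B's per-cell step in the union phase
def BStep (m : List (List Int))
    (st : PySem.Dict (Int × Int) (Int × Int) × PySem.Dict (Int × Int) Int × Int)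
    (c : Int × Int) :
    PySem.Dict (Int × Int) (Int × Int) × PySem.Dict (Int × Int) Int × Int :=
  if getIJ m c.1 c.2 = 0 then st
  else
    [((c.1 + 1, c.2) : Int × Int), (c.1, c.2 + 1)].foldl (fun st d =>
      if d.1 < (m.length : Int) ∧ d.2 < (m.length : Int) ∧ getIJ m d.1 d.2 ≠ 0 then
        ufUnite st c d
      else st) st

-- B's per-cell step in the initialisation phase
def BInit (m : List (List Int))
    (st : PySem.Dict (Int × Int) (Int × Int) × PySem.Dict (Int × Int) Int)
    (c : Int × Int) :
    PySem.Dict (Int × Int) (Int × Int) × PySem.Dict (Int × Int) Int :=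
  if getIJ m c.1 c.2 ≠ 0 then (st.1.insert c c, st.2.insert c 1) else st

theorem dr_cond (m : List (List Int)) (c d : Int × Int) (hcG : InG (m.length : Int) c)
    (hcI : getIJ m c.1 c.2 ≠ 0)
    (hshape : (d.1 = c.1 + 1 ∧ d.2 = c.2) ∨ (d.1 = c.1 ∧ d.2 = c.2 + 1)) :
    DR m c d ↔ (d.1 < (m.length : Int) ∧ d.2 < (m.length : Int) ∧ getIJ m d.1 d.2 ≠ 0) := by
  obtain ⟨h1, h2, h3, h4⟩ := hcG
  constructor
  · intro hdr
    obtain ⟨⟨_, ⟨⟨g1, g2, g3, g4⟩, gv⟩, _⟩, _⟩ := hdr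
    exact ⟨g2, g4, gv⟩
  · rintro ⟨g1, g2, g3⟩
    refine ⟨⟨⟨⟨h1, h2, h3, h4⟩, hcI⟩, ⟨⟨by omega, g1, by omega, g2⟩, g3⟩, ?_⟩, hshape⟩
    rcases hshape with ⟨e1, e2⟩ | ⟨e1, e2⟩
    · exact Or.inr (Or.inl ⟨e1, e2⟩)
    · exact Or.inr (Or.inr (Or.inr ⟨e1, e2⟩))

theorem dr_shape {m : List (List Int)} {c v : Int × Int} (h : DR m c v) :
    v = (c.1 + 1, c.2) ∨ v = (c.1, c.2 + 1) := by
  rcases h.2 with ⟨e1, e2⟩ | ⟨e1, e2⟩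
  · exact Or.inl (Prod.ext e1 e2)
  · exact Or.inr (Prod.ext e1 e2)

theorem BStep_inv (m : List (List Int)) (P : List (Int × Int)) (c : Int × Int)
    (st : PySem.Dict (Int × Int) (Int × Int) × PySem.Dict (Int × Int) Int × Int)
    (hc : InG (m.length : Int) c) (h : UFInv m (EP m P) st) :
    UFInv m (EP m (P ++ [c])) (BStep m st c) := by
  by_cases hice : getIJ m c.1 c.2 = 0
  · rw [BStep, if_pos hice]
    apply UFInv_congr ?_ h
    intro u v
    constructor
    · rintro ⟨h1, h2⟩
      exact ⟨List.mem_append_left _ h1, h2⟩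
    · rintro ⟨h1, h2⟩
      rcases List.mem_append.1 h1 with h' | h'
      · exact ⟨h', h2⟩
      · rw [List.mem_singleton] at h'
        subst h'
        exact absurd h2.1.1.2 (not_not_intro hice)
  · rw [BStep, if_neg hice]
    simp only [List.foldl_cons, List.foldl_nil]
    have hcond1 := dr_cond m c (c.1 + 1, c.2) hc hice (Or.inl ⟨rfl, rfl⟩)
    have hcond2 := dr_cond m c (c.1, c.2 + 1) hc hice (Or.inr ⟨rfl, rfl⟩)
    have hcI : c ∈ icelist m := (mem_icelist m c).2 ⟨hc, hice⟩
    -- the target relation, expressed through the two candidate edges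
    have hEPiff : ∀ (R : (Int × Int) → (Int × Int) → Prop),
        (∀ u v, R u v ↔ (EP m P u v ∨ (DR m c (c.1 + 1, c.2) ∧ u = c ∧ v = (c.1 + 1, c.2))
          ∨ (DR m c (c.1, c.2 + 1) ∧ u = c ∧ v = (c.1, c.2 + 1)))) →
        ∀ u v, R u v ↔ EP m (P ++ [c]) u v := by
      intro R hR u v
      rw [hR u v]
      constructor
      · rintro (⟨h1, h2⟩ | ⟨hdr, rfl, rfl⟩ | ⟨hdr, rfl, rfl⟩)
        · exact ⟨List.mem_append_left _ h1, h2⟩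
        · exact ⟨List.mem_append_right _ (by simp), hdr⟩
        · exact ⟨List.mem_append_right _ (by simp), hdr⟩
      · rintro ⟨h1, h2⟩
        rcases List.mem_append.1 h1 with h' | h'
        · exact Or.inl ⟨h', h2⟩
        · rw [List.mem_singleton] at h'
          subst h'
          rcases dr_shape h2 with h'' | h''
          · subst h''
            exact Or.inr (Or.inl ⟨h2, rfl, rfl⟩)
          · subst h''
            exact Or.inr (Or.inr ⟨h2, rfl, rfl⟩)
    by_cases hc1 : ((c.1 + 1, c.2) : Int × Int).1 < (m.length : Int) ∧
        ((c.1 + 1, c.2) : Int × Int).2 < (m.length : Int) ∧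
        getIJ m ((c.1 + 1, c.2) : Int × Int).1 ((c.1 + 1, c.2) : Int × Int).2 ≠ 0
    · rw [if_pos hc1]
      have hd1I : (c.1 + 1, c.2) ∈ icelist m :=
        (mem_icelist m _).2 (hcond1.2 hc1).1.2.1
      have h1 := ufUnite_inv m (EP m P) st c (c.1 + 1, c.2) hcI hd1I h
      by_cases hc2 : ((c.1, c.2 + 1) : Int × Int).1 < (m.length : Int) ∧
          ((c.1, c.2 + 1) : Int × Int).2 < (m.length : Int) ∧
          getIJ m ((c.1, c.2 + 1) : Int × Int).1 ((c.1, c.2 + 1) : Int × Int).2 ≠ 0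
      · rw [if_pos hc2]
        have hd2I : (c.1, c.2 + 1) ∈ icelist m :=
          (mem_icelist m _).2 (hcond2.2 hc2).1.2.1
        have h2 := ufUnite_inv m _ _ c (c.1, c.2 + 1) hcI hd2I h1
        apply UFInv_congr ?_ h2
        apply hEPiff
        intro u v
        constructor
        · rintro ((h' | ⟨rfl, rfl⟩) | ⟨rfl, rfl⟩)
          · exact Or.inl h'
          · exact Or.inr (Or.inl ⟨hcond1.2 (by simpa using hc1), rfl, rfl⟩)
          · exact Or.inr (Or.inr ⟨hcond2.2 (by simpa using hc2), rfl, rfl⟩)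
        · rintro (h' | ⟨_, rfl, rfl⟩ | ⟨_, rfl, rfl⟩)
          · exact Or.inl (Or.inl h')
          · exact Or.inl (Or.inr ⟨rfl, rfl⟩)
          · exact Or.inr ⟨rfl, rfl⟩
      · rw [if_neg hc2]
        apply UFInv_congr ?_ h1
        apply hEPiff
        intro u v
        constructor
        · rintro (h' | ⟨rfl, rfl⟩)
          · exact Or.inl h'
          · exact Or.inr (Or.inl ⟨hcond1.2 (by simpa using hc1), rfl, rfl⟩)
        · rintro (h' | ⟨_, rfl, rfl⟩ | ⟨hdr, rfl, rfl⟩)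
          · exact Or.inl h'
          · exact Or.inr ⟨rfl, rfl⟩
          · exact absurd (by simpa using hcond2.1 hdr) hc2
    · rw [if_neg hc1]
      by_cases hc2 : ((c.1, c.2 + 1) : Int × Int).1 < (m.length : Int) ∧
          ((c.1, c.2 + 1) : Int × Int).2 < (m.length : Int) ∧
          getIJ m ((c.1, c.2 + 1) : Int × Int).1 ((c.1, c.2 + 1) : Int × Int).2 ≠ 0
      · rw [if_pos hc2]
        have hd2I : (c.1, c.2 + 1) ∈ icelist m :=
          (mem_icelist m _).2 (hcond2.2 hc2).1.2.1
        have h2 := ufUnite_inv m (EP m P) st c (c.1, c.2 + 1) hcI hd2I h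
        apply UFInv_congr ?_ h2
        apply hEPiff
        intro u v
        constructor
        · rintro (h' | ⟨rfl, rfl⟩)
          · exact Or.inl h'
          · exact Or.inr (Or.inr ⟨hcond2.2 (by simpa using hc2), rfl, rfl⟩)
        · rintro (h' | ⟨hdr, rfl, rfl⟩ | ⟨_, rfl, rfl⟩)
          · exact Or.inl h'
          · exact absurd (by simpa using hcond1.1 hdr) hc1
          · exact Or.inr ⟨rfl, rfl⟩
      · rw [if_neg hc2]
        apply UFInv_congr ?_ h
        apply hEPiff
        intro u v
        constructor
        · intro h'
          exact Or.inl h'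
        · rintro (h' | ⟨hdr, rfl, rfl⟩ | ⟨hdr, rfl, rfl⟩)
          · exact h'
          · exact absurd (by simpa using hcond1.1 hdr) hc1
          · exact absurd (by simpa using hcond2.1 hdr) hc2

def initDicts (m : List (List Int)) :
    PySem.Dict (Int × Int) (Int × Int) × PySem.Dict (Int × Int) Int :=
  (cellsL (m.length : Int)).foldl (BInit m) (PySem.Dict.empty, PySem.Dict.empty)

def bestInit (m : List (List Int)) : Int := if (initDicts m).1.size = 0 then 0 else 1

def InitInv (m : List (List Int)) (P : List (Int × Int))
    (st : PySem.Dict (Int × Int) (Int × Int) × PySem.Dict (Int × Int) Int) : Prop :=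
  st.1.keys = P.filter (fun c => decide (getIJ m c.1 c.2 ≠ 0)) ∧
  st.2.keys = P.filter (fun c => decide (getIJ m c.1 c.2 ≠ 0)) ∧
  ∀ x ∈ P.filter (fun c => decide (getIJ m c.1 c.2 ≠ 0)), st.1.getD x x = x ∧ st.2.getD x 0 = 1

theorem BInit_inv (m : List (List Int)) (P : List (Int × Int)) (c : Int × Int)
    (st : PySem.Dict (Int × Int) (Int × Int) × PySem.Dict (Int × Int) Int)
    (hcnot : c ∉ P) (h : InitInv m P st) : InitInv m (P ++ [c]) (BInit m st c) := by
  obtain ⟨h1, h2, h3⟩ := h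
  by_cases hice : getIJ m c.1 c.2 ≠ 0
  · rw [BInit, if_pos hice]
    have hfl : (P ++ [c]).filter (fun c => decide (getIJ m c.1 c.2 ≠ 0))
        = P.filter (fun c => decide (getIJ m c.1 c.2 ≠ 0)) ++ [c] := by
      rw [List.filter_append]
      congr 1
      simp [hice]
    have hc1 : st.1.contains c = false := by
      by_contra hcc
      have hcc' : st.1.contains c = true := by simpa using hcc
      have := (PySem.Dict.contains_iff_mem_keys _ _).1 hcc'
      rw [h1] at this
      exact hcnot (List.mem_filter.1 this).1
    have hc2 : st.2.contains c = false := by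
      by_contra hcc
      have hcc' : st.2.contains c = true := by simpa using hcc
      have := (PySem.Dict.contains_iff_mem_keys _ _).1 hcc'
      rw [h2] at this
      exact hcnot (List.mem_filter.1 this).1
    refine ⟨?_, ?_, ?_⟩
    · rw [PySem.Dict.keys_insert_of_not_contains _ _ hc1, h1, hfl]
    · rw [PySem.Dict.keys_insert_of_not_contains _ _ hc2, h2, hfl]
    · intro x hx
      rw [hfl] at hx
      rcases List.mem_append.1 hx with h' | h'
      · have hxc : x ≠ c := by
          rintro rfl
          exact hcnot (List.mem_filter.1 h').1
        rw [PySem.Dict.getD_insert, if_neg hxc, PySem.Dict.getD_insert, if_neg hxc]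
        exact h3 x h'
      · rw [List.mem_singleton] at h'
        subst h'
        rw [PySem.Dict.getD_insert, if_pos rfl, PySem.Dict.getD_insert, if_pos rfl]
        exact ⟨rfl, rfl⟩
  · rw [BInit, if_neg hice]
    have hfl : (P ++ [c]).filter (fun c => decide (getIJ m c.1 c.2 ≠ 0))
        = P.filter (fun c => decide (getIJ m c.1 c.2 ≠ 0)) := by
      rw [List.filter_append]
      simp [hice]
    exact ⟨by rw [hfl]; exact h1, by rw [hfl]; exact h2, by rw [hfl]; exact h3⟩

theorem init_scan (m : List (List Int)) :
    InitInv m (cellsL (m.length : Int)) (initDicts m) := by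
  have h := foldl_prefix_inv (BInit m) (InitInv m) (fun _ => True)
    (fun P x s _ hx hs => BInit_inv m P x s hx hs)
    (cellsL (m.length : Int)) [] (PySem.Dict.empty, PySem.Dict.empty)
    (nodup_cellsL _) (fun x _ => ⟨trivial, by simp⟩) ?_
  · simpa using h
  · refine ⟨by simp, by simp, by simp⟩

theorem filter_eq_len_one {I : List (Int × Int)} (hnd : I.Nodup) {x : Int × Int} (hx : x ∈ I) :
    (I.filter (fun y => decide (y = x))).length = 1 := by
  have h1 : (I.filter (fun y => decide (y = x))).length = List.count x I := by
    rw [List.count, List.countP_eq_length_filter]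
    congr 1
    apply List.filter_congr
    intro y _
    exact (Bool.beq_eq_decide_eq y x).symm
  rw [h1]
  exact List.count_eq_one_of_mem hnd hx

theorem B_base (m : List (List Int)) :
    UFInv m (EP m []) ((initDicts m).1, (initDicts m).2, bestInit m) := by
  obtain ⟨h1, h2, h3⟩ := init_scan m
  have h1' : (initDicts m).1.keys = icelist m := h1
  have h2' : (initDicts m).2.keys = icelist m := h2
  have h3' : ∀ x ∈ icelist m, (initDicts m).1.getD x x = x ∧ (initDicts m).2.getD x 0 = 1 := h3
  refine ⟨fun x => x, fun _ => 0, h1', h2', ?_, ?_, ?_, ?_, ?_⟩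
  · intro x hx
    obtain ⟨hg, _⟩ := h3' x hx
    dsimp only
    exact ⟨by rw [hg]; exact hx, fun _ => rfl, fun hne => absurd hg hne, hx, hg,
      List.length_pos_of_mem (List.mem_filter.2 ⟨hx, by simp⟩)⟩
  · intro x hx y hy
    dsimp only
    constructor
    · intro hxy
      subst hxy
      exact Relation.EqvGen.refl _
    · intro h'
      exact eqvGen_false
        (Relation.EqvGen.mono (fun a b hab => absurd hab.1 (List.not_mem_nil)) h')
  · intro ρ hρ _
    dsimp only
    rw [(h3' ρ hρ).2, filter_eq_len_one (nodup_icelist m) hρ]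
    rfl
  · intro x hx
    dsimp only
    rw [filter_eq_len_one (nodup_icelist m) hx]
    unfold bestInit
    have hne : (initDicts m).1.size ≠ 0 := by
      rw [dict_size_eq_keys_length, h1']
      intro hlen
      rw [List.length_eq_zero_iff.1 hlen] at hx
      exact absurd hx (List.not_mem_nil)
    rw [if_neg hne]
    rfl
  · unfold bestInit
    by_cases hsz0 : (initDicts m).1.size = 0
    · rw [if_pos hsz0]
      exact Or.inl rfl
    · rw [if_neg hsz0]
      have hne : icelist m ≠ [] := by
        intro hnil
        rw [dict_size_eq_keys_length, h1', hnil] at hsz0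
        exact hsz0 rfl
      obtain ⟨x0, hx0⟩ := List.exists_mem_of_ne_nil _ hne
      refine Or.inr ⟨x0, hx0, ?_⟩
      dsimp only
      rw [filter_eq_len_one (nodup_icelist m) hx0]
      rfl

theorem B_scan (m : List (List Int)) :
    UFInv m (EP m (cellsL (m.length : Int)))
      ((cellsL (m.length : Int)).foldl (BStep m)
        ((initDicts m).1, (initDicts m).2, bestInit m)) := by
  have h := foldl_prefix_inv (BStep m) (fun P st => UFInv m (EP m P) st) (InG (m.length : Int))
    (fun P x s hx _ hs => BStep_inv m P x s hx hs)
    (cellsL (m.length : Int)) [] ((initDicts m).1, (initDicts m).2, bestInit m)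
    (nodup_cellsL _) (fun x hx => ⟨(mem_cellsL _ _).1 hx, by simp⟩) (B_base m)
  simpa using h

theorem B_MaxSpec (m : List (List Int)) :
    MaxSpec m ((cellsL (m.length : Int)).foldl (BStep m)
      ((initDicts m).1, (initDicts m).2, bestInit m)).2.2 := by
  have h := B_scan m
  have h' := UFInv_congr (E' := DR m) (fun u v =>
    ⟨fun hh => hh.2, fun hd => ⟨(mem_cellsL _ _).2 hd.1.1.1, hd⟩⟩) h
  obtain ⟨r, dh, _, _, _, hsem, _, hbd, hat⟩ := h'
  have key : ∀ x ∈ icelist m,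
      ((icelist m).filter (fun y => decide (r y = r x))).length = csN m x := by
    intro x hx
    rw [csN]
    refine (ncard_eq_list_length _ _ ((nodup_icelist m).filter _) ?_).symm
    intro y
    rw [List.mem_filter, Set.mem_setOf_eq]
    constructor
    · rintro ⟨hyI, hd⟩
      have hd' : r y = r x := by simpa using hd
      exact eqvGen_dr_iff.1 ((hsem x hx y hyI).1 hd'.symm)
    · intro hy
      have hyIce : IceP m y := ReachP_ice ((mem_icelist m x).1 hx) hy
      have hyI : y ∈ icelist m := (mem_icelist m y).2 hyIce
      have : r x = r y := (hsem x hx y hyI).2 (eqvGen_dr_iff.2 hy)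
      exact ⟨hyI, by simp [this.symm]⟩
  constructor
  · intro x hx
    have hxI := (mem_icelist m x).2 hx
    have hb := hbd x hxI
    rwa [key x hxI] at hb
  · rcases hat with h0 | ⟨x, hx, heq⟩
    · exact Or.inl h0
    · exact Or.inr ⟨x, (mem_icelist m x).1 hx, by rw [heq, key x hx]⟩


-- putting the two programs in decomposed form ---------------------------------

def Tfold (m : List (List Int)) : Int :=
  (cellsL (m.length : Int)).foldl (fun t c => t + getIJ m c.1 c.2) 0

def Amax (m : List (List Int)) : Int :=
  ((cellsL (m.length : Int)).foldl (AStep m) ((0 : Int), PySem.Set.empty)).1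

def Bbest (m : List (List Int)) : Int :=
  ((cellsL (m.length : Int)).foldl (BStep m)
    ((initDicts m).1, (initDicts m).2, bestInit m)).2.2

theorem A_flat_proj (m : List (List Int)) :
    ∀ (L : List (Int × Int)) (s0 : Int × Int × PySem.Set (Int × Int)),
      L.foldl (fun st (c : Int × Int) =>
        let total := st.1 + getIJ m c.1 c.2
        if getIJ m c.1 c.2 = 0 ∨ (c.1, c.2) ∈ st.2.2 then (total, st.2.1, st.2.2)
        else
          let r := bfsA m (m.length : Int) (m.length * m.length + 1)
            (PySem.Set.add st.2.2 (c.1, c.2)) [(c.1, c.2)] 0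
          (total, max r.2 st.2.1, r.1)) s0
      = (L.foldl (fun t c => t + getIJ m c.1 c.2) s0.1, L.foldl (AStep m) s0.2) := by
  intro L
  induction L with
  | nil => intro s0; rfl
  | cons c L ih =>
    intro s0
    simp only [List.foldl_cons]
    rw [ih]
    have h1 : (let total := s0.1 + getIJ m c.1 c.2
        if getIJ m c.1 c.2 = 0 ∨ (c.1, c.2) ∈ s0.2.2 then (total, s0.2.1, s0.2.2)
        else
          let r := bfsA m (m.length : Int) (m.length * m.length + 1)
            (PySem.Set.add s0.2.2 (c.1, c.2)) [(c.1, c.2)] 0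
          (total, max r.2 s0.2.1, r.1)).1 = s0.1 + getIJ m c.1 c.2 := by
      dsimp only
      split <;> rfl
    have h2 : (let total := s0.1 + getIJ m c.1 c.2
        if getIJ m c.1 c.2 = 0 ∨ (c.1, c.2) ∈ s0.2.2 then (total, s0.2.1, s0.2.2)
        else
          let r := bfsA m (m.length : Int) (m.length * m.length + 1)
            (PySem.Set.add s0.2.2 (c.1, c.2)) [(c.1, c.2)] 0
          (total, max r.2 s0.2.1, r.1)).2 = AStep m s0.2 c := by
      dsimp only
      rw [AStep]
      by_cases hc : getIJ m c.1 c.2 = 0 ∨ c ∈ s0.2.2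
      · rw [if_pos hc, if_pos hc]
      · rw [if_neg hc, if_neg hc]
    rw [h1, h2]

theorem B_flat_proj (m : List (List Int)) :
    ∀ (L : List (Int × Int))
      (s0 : Int × PySem.Dict (Int × Int) (Int × Int) × PySem.Dict (Int × Int) Int),
      L.foldl (fun st (c : Int × Int) =>
        let t := st.1 + getIJ m c.1 c.2
        if getIJ m c.1 c.2 ≠ 0 then (t, st.2.1.insert (c.1, c.2) (c.1, c.2), st.2.2.insert (c.1, c.2) 1)
        else (t, st.2)) s0
      = (L.foldl (fun t c => t + getIJ m c.1 c.2) s0.1, L.foldl (BInit m) s0.2) := by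
  intro L
  induction L with
  | nil => intro s0; rfl
  | cons c L ih =>
    intro s0
    simp only [List.foldl_cons]
    rw [ih]
    have h1 : (let t := s0.1 + getIJ m c.1 c.2
        if getIJ m c.1 c.2 ≠ 0 then (t, s0.2.1.insert (c.1, c.2) (c.1, c.2), s0.2.2.insert (c.1, c.2) 1)
        else (t, s0.2)).1 = s0.1 + getIJ m c.1 c.2 := by
      dsimp only
      split <;> rfl
    have h2 : (let t := s0.1 + getIJ m c.1 c.2
        if getIJ m c.1 c.2 ≠ 0 then (t, s0.2.1.insert (c.1, c.2) (c.1, c.2), s0.2.2.insert (c.1, c.2) 1)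
        else (t, s0.2)).2 = BInit m s0.2 c := by
      dsimp only
      rw [BInit]
      by_cases hc : getIJ m c.1 c.2 ≠ 0
      · rw [if_pos hc, if_pos hc]
      · rw [if_neg hc, if_neg hc]
    rw [h1, h2]

theorem A_decomp (m : List (List Int)) : calcRestIce m = [Tfold m, Amax m] := by
  unfold calcRestIce Tfold Amax
  simp only [PySem.List.len_eq]
  rw [foldl_pairs, A_flat_proj]

theorem B_decomp (m : List (List Int)) : calcRestIce_alt m = [Tfold m, Bbest m] := by
  unfold calcRestIce_alt Tfold Bbest initDicts bestInit
  simp only [PySem.List.len_eq, foldl_pairs, B_flat_proj]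
  rfl

theorem calcRestIce_eq (m : List (List Int)) : calcRestIce m = calcRestIce_alt m := by
  rw [A_decomp m, B_decomp m]
  have h1 : MaxSpec m (Amax m) := A_MaxSpec m
  have h2 : MaxSpec m (Bbest m) := B_MaxSpec m
  rw [MaxSpec_unique h1 h2]

-- ===== VERDICT (by name: the statement is the Claim_ definition above) =====
theorem calcRestIce_spec : Claim_equal_calcRestIce := by
  intro m _ _
  unfold Spec_calcRestIce
  exact calcRestIce_eq m
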